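-- pv_equiv track=rewrite | github.com/mayank905/Geek4geek | Best Node.py | bestNode
-- ===== SOURCE A (Python) =====
-- from typing import List
-- from collections import defaultdict
--
-- def bestValue(Source, dp, children, Value, sign):
--     if dp[Source] == -1:
--         if sign == 1:
--             mul = 1
--             sign = 0
--         else:
--             mul = -1
--             sign = 1
--         value = Value[Source - 1] * mul
--         if Source not in children:
--             dp[Source]=value
--             return value
--         ans = -10 ** 6
--         for element in children[Source]:
--             ans = max(ans, value + bestValue(element, dp, children, Value, sign))
--         dp[Source] = ans
--         return ans
--     else:
--         return dp[Source]
--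
-- def bestNode(N: int, A: List[int], P: List[int]) -> int:
--     # code here
--     dp1 = [-1]*(N + 1)
--     dp0 = [-1]*(N + 1)
--     children = defaultdict(list)
--     level = defaultdict(int)
--     for i in range(1, len(P) + 1):
--         if P[i - 1] == -1:
--             continue
--         children[P[i - 1]].append(i)
--     ans = -10 ** 6
--     dp1[0]=bestValue(1, dp1, children, A, 1)
--     ans=dp1[0]
--     dp0[0]=bestValue(1, dp0, children, A, -1)
--     level[1]=1
--     for i in range(1,N+1):
--         for element in children[i]:
--             level[element]=level[i]+1
--     for i in range(1, N + 1):
--         if level[i]%2==1: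
--             ans=max(ans,dp1[i])
--         else:
--             ans = max(ans,dp0[i])
--     return ans
-- ===== SOURCE B (Python) =====
-- # One iterative pass instead of two memoized recursive traversals: an explicit-stack
-- # DFS from the root computes, for every node of the root's component, its best
-- # downward alternating sum in both games at once (game 1 adds on odd levels and
-- # subtracts on even ones, game 0 the opposite); nodes outside the root's component
-- # keep score -1, and each node is finally scored by the game its level selects.
-- def bestNode(N, A, P):
--     NEG = -10 ** 6
--     children = [[] for _ in range(N + 1)]
--     for i, p in enumerate(P, 1):
--         if 1 <= p <= N and i <= N:
--             children[p].append(i)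
--     d1 = [-1] * (N + 1)
--     d0 = [-1] * (N + 1)
--     order = []
--     stack = [(1, 1)]
--     while stack:
--         u, m = stack.pop()
--         order.append((u, m))
--         stack.extend((c, -m) for c in children[u])
--     for u, m in reversed(order):
--         a = m * A[u - 1]
--         if children[u]:
--             b1 = b0 = NEG
--             for c in children[u]:
--                 b1 = max(b1, a + d1[c])
--                 b0 = max(b0, -a + d0[c])
--             d1[u], d0[u] = b1, b0
--         else:
--             d1[u], d0[u] = a, -a
--     level = [0] * (N + 1)
--     level[1] = 1
--     for i in range(1, N + 1):
--         for c in children[i]: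
--             level[c] = level[i] + 1
--     best = d1[1]
--     for i in range(1, N + 1):
--         best = max(best, d1[i] if level[i] % 2 == 1 else d0[i])
--     return best
-- ===== Notes on version B (the rewrite author's own statement) =====
-- stated objective: alternative
-- what changed: A runs two separate memoized recursive DFS passes (one per game, each threading a -1-sentinel dp array through the recursion); B does one explicit-stack DFS carrying the alternating multiplier and one bottom-up sweep that fills both games' score arrays at once, followed by the same level-table and per-level selection loop. Pre_ excludes exactly the inputs on which A raises or never terminates (N < 1, empty A, a parent cycle through node 1, or a node whose parent chain reaches node 1 lying outside dp's or A's index range).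
import Mathlib
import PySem

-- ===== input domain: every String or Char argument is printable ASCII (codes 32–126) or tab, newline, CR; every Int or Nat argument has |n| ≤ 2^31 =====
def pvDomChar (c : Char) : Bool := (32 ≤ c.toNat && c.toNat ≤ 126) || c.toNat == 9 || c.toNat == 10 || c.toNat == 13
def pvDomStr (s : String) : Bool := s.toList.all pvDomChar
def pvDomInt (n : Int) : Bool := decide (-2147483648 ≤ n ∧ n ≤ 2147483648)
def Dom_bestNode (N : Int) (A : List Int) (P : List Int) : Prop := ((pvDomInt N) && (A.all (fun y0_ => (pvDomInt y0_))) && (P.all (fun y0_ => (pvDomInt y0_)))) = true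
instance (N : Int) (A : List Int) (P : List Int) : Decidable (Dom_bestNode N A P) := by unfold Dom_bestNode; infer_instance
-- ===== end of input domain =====

-- B replaces A's two memoized recursive DFS passes by one explicit-stack DFS that
-- computes both games' scores per visited node at once (alternative decomposition,
-- same asymptotic cost); the level table and per-level selection are computed the
-- same way.

-- ===== PORT A =====

-- children = defaultdict(list); for i in range(1, len(P)+1): if P[i-1] == -1: continue; children[P[i-1]].append(i)
def pvChildrenA (P : List Int) : PySem.Dict Int (List Int) :=
  (PySem.List.pyRange 1 ((P.length : Int) + 1) 1).foldl
    (fun d i =>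
      if PySem.List.pyGetD P (i - 1) 0 = -1 then d
      else d.modify (PySem.List.pyGetD P (i - 1) 0) [] (fun l => l ++ [i]))
    PySem.Dict.empty

-- bestValue, with the dp list threaded through; fuel models Python's recursion
-- (none = the call does not return: RecursionError / IndexError)
def bestValueA : Nat → Int → List Int → PySem.Dict Int (List Int) → List Int → Int →
    Option (Int × List Int)
  | 0, _, _, _, _, _ => none
  | (f+1), source, dp, children, value, sign =>
    match PySem.List.pyGet? dp source with          -- dp[Source] (IndexError → none)
    | none => none
    | some d =>
      if d = -1 then
        let mulsign : Int × Int := if sign = 1 then ((1 : Int), (0 : Int)) else (-1, 1)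
        match PySem.List.pyGet? value (source - 1) with   -- Value[Source-1]
        | none => none
        | some a =>
          let v := a * mulsign.1
          if children.contains source = false then
            some (v, dp.set source.toNat v)          -- dp[Source] = value (source ≥ 1 at every call)
          else
            match (children.getD source []).foldl
                (fun acc element => acc.bind fun p =>
                  (bestValueA f element p.2 children value mulsign.2).bind fun q =>
                    some (max p.1 (v + q.1), q.2))
                (some ((-10 ^ 6 : Int), dp)) with
            | none => none
            | some (ans, dpF) => some (ans, dpF.set source.toNat ans)   -- dp[Source] = ans
      else some (d, dp)

def bestNode (N : Int) (A : List Int) (P : List Int) : Int :=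
  let dp1 := List.replicate (N + 1).toNat (-1 : Int)
  let dp0 := List.replicate (N + 1).toNat (-1 : Int)
  let children := pvChildrenA P
  match bestValueA (N.toNat + 1) 1 dp1 children A 1 with
  | none => 0          -- Python raises / diverges here (outside Pre_bestNode)
  | some (r1, dp1') =>
    match bestValueA (N.toNat + 1) 1 dp0 children A (-1) with
    | none => 0        -- Python raises / diverges here (outside Pre_bestNode)
    | some (r0, dp0') =>
      let dp1f := dp1'.set 0 r1                     -- dp1[0] = bestValue(...)
      let dp0f := dp0'.set 0 r0                     -- dp0[0] = bestValue(...)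
      let level0 : PySem.Dict Int Int := PySem.Dict.empty.insert 1 1   -- level[1] = 1
      -- for i in range(1, N+1): for element in children[i]: level[element] = level[i] + 1
      -- (the defaultdict read children[i] also inserts empty lists; children is not used
      --  afterwards, so reading getD is exact for the returned value)
      let level := (PySem.List.pyRange 1 (N + 1) 1).foldl
        (fun lv i => (children.getD i []).foldl
          (fun lv e => lv.insert e (lv.getD i 0 + 1)) lv) level0
      -- ans = dp1[0]; for i in range(1, N+1): parity pick (indices 1..N are in range of dp1/dp0)
      (PySem.List.pyRange 1 (N + 1) 1).foldl
        (fun a i =>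
          if PySem.Int.mod (level.getD i 0) 2 = 1 then max a (dp1f.getD i.toNat 0)
          else max a (dp0f.getD i.toNat 0)) r1

-- ===== PORT B =====

-- children = [[] for _ in range(N+1)]; for i, p in enumerate(P, 1):
--   if 1 <= p <= N and i <= N: children[p].append(i)
def pvChB (N : Int) (P : List Int) : List (List Int) :=
  (PySem.List.pyRange 1 ((P.length : Int) + 1) 1).foldl
    (fun arr i =>
      let p := PySem.List.pyGetD P (i - 1) 0
      if 1 ≤ p ∧ p ≤ N ∧ i ≤ N then arr.set p.toNat (arr.getD p.toNat [] ++ [i]) else arr)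
    (List.replicate (N + 1).toNat [])

-- while stack: u, m = stack.pop(); order.append((u, m)); stack.extend((c, -m) for c in children[u])
-- (pop takes the LAST element; fuel bounds the iterations, none = still looping / IndexError)
def pvDFS (ch : List (List Int)) : Nat → List (Int × Int) → List (Int × Int) →
    Option (List (Int × Int))
  | f, stack, order =>
    match stack.getLast? with
    | none => some order
    | some um =>
      match f with
      | 0 => none
      | f + 1 =>
        match PySem.List.pyGet? ch um.1 with
        | none => none
        | some ku => pvDFS ch f (stack.dropLast ++ ku.map (fun c => (c, -um.2)))
            (order ++ [um])

-- one iteration of 'for u, m in reversed(order)': the body filling d1/d0 (none = IndexError)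
def pvSweep (A : List Int) (ch : List (List Int)) (st : List Int × List Int)
    (um : Int × Int) : Option (List Int × List Int) :=
  (PySem.List.pyGet? A (um.1 - 1)).bind fun a0 =>          -- a = m * A[u - 1]
    let a := um.2 * a0
    (PySem.List.pyGet? ch um.1).bind fun ku =>             -- children[u]
      if ku = [] then
        (PySem.List.pySet? st.1 um.1 a).bind fun d1' =>    -- d1[u], d0[u] = a, -a
          (PySem.List.pySet? st.2 um.1 (-a)).bind fun d0' => some (d1', d0')
      else
        (ku.foldl (fun acc c => acc.bind fun bb =>
            (PySem.List.pyGet? st.1 c).bind fun v1 =>      -- b1 = max(b1, a + d1[c])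
              (PySem.List.pyGet? st.2 c).bind fun v0 =>    -- b0 = max(b0, -a + d0[c])
                some (max bb.1 (a + v1), max bb.2 (-a + v0)))
          (some ((-10 ^ 6 : Int), (-10 ^ 6 : Int)))).bind fun bb =>
          (PySem.List.pySet? st.1 um.1 bb.1).bind fun d1' =>   -- d1[u], d0[u] = b1, b0
            (PySem.List.pySet? st.2 um.1 bb.2).bind fun d0' => some (d1', d0')

def bestNode_alt (N : Int) (A : List Int) (P : List Int) : Int :=
  let children := pvChB N P
  match pvDFS children (N.toNat + 1) [(1, 1)] [] with
  | none => 0      -- the while loop is still running / raised (outside Pre_bestNode)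
  | some order =>
    match order.reverse.foldl (fun acc um =>
        acc.bind fun st => pvSweep A children st um)
        (some (List.replicate (N + 1).toNat (-1 : Int),
          List.replicate (N + 1).toNat (-1 : Int))) with
    | none => 0    -- IndexError in the sweep (outside Pre_bestNode)
    | some st =>
      -- level = [0]*(N+1); level[1] = 1; the same level loop as the original problem
      let level := (PySem.List.pyRange 1 (N + 1) 1).foldl
        (fun lv i => (children.getD i.toNat []).foldl
          (fun lv c => lv.set c.toNat (lv.getD i.toNat 0 + 1)) lv)
        ((List.replicate (N + 1).toNat (0 : Int)).set 1 1)
      -- best = d1[1]; each node scored by the game its level parity selects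
      match PySem.List.pyGet? st.1 1 with
      | none => 0  -- IndexError on d1[1] (outside Pre_bestNode)
      | some b0 =>
        (PySem.List.pyRange 1 (N + 1) 1).foldl
          (fun best i =>
            max best (if PySem.Int.mod (level.getD i.toNat 0) 2 = 1
              then st.1.getD i.toNat 0 else st.2.getD i.toNat 0)) b0

-- ===== PRECONDITION & SPEC =====

-- the parent map encoded by P: P[v-1] for v in 1..len(P), a dead 0 outside
def pvParP (P : List Int) (v : Int) : Int :=
  if 1 ≤ v ∧ v ≤ (P.length : Int) then PySem.List.pyGetD P (v - 1) 0 else 0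

-- Exactly the inputs on which the Python A returns normally: N ≥ 1 and A nonempty
-- (else IndexError on dp[1] / A[0]), node 1 not on a parent-pointer cycle (else the
-- recursion never terminates), and every node whose parent chain reaches node 1 within
-- the index range of dp (≤ N) and of A (else IndexError during the traversal).
def Pre_bestNode (N : Int) (A : List Int) (P : List Int) : Prop :=
  1 ≤ N ∧ 1 ≤ (A.length : Int) ∧
  (∀ j ∈ List.range (P.length + 2), 1 ≤ j → (pvParP P)^[j] 1 ≠ 1) ∧
  (∀ v ∈ PySem.List.pyRange 1 ((P.length : Int) + 1) 1,
    (∃ j ∈ List.range (P.length + 2), (pvParP P)^[j] v = 1) →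
      v ≤ N ∧ v ≤ (A.length : Int))

instance (N : Int) (A : List Int) (P : List Int) : Decidable (Pre_bestNode N A P) := by
  unfold Pre_bestNode; infer_instance

def pvWitness_bestNode : Int × List Int × List Int := (3, [5, -2, 4], [-1, 1, 2])

def Spec_bestNode (N : Int) (A : List Int) (P : List Int) (out : Int) : Prop := out = bestNode_alt N A P
instance (N : Int) (A : List Int) (P : List Int) (out : Int) : Decidable (Spec_bestNode N A P out) := by unfold Spec_bestNode; infer_instance

-- ===== CLAIM (what is proved, stated in full; the proofs are below) =====
def Claim_equal_bestNode : Prop := ∀ (N : Int) (A : List Int) (P : List Int), Dom_bestNode N A P → Pre_bestNode N A P → Spec_bestNode N A P (bestNode N A P)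

-- ===== LEMMAS AND PROOFS =====


-- § generic list helpers

theorem pvGetSome {α : Type} (xs : List α) (d : α) (v : Int) (h0 : 0 ≤ v)
    (h : v.toNat < xs.length) : PySem.List.pyGet? xs v = some (xs.getD v.toNat d) := by
  rw [PySem.List.pyGet?_eq_some_getElem (xs := xs) h0 (by omega)]
  simp [List.getD_eq_getElem?_getD, List.getElem?_eq_getElem h]

theorem pvSetSome {α : Type} (xs : List α) (v : Int) (a : α) (h0 : 0 ≤ v)
    (h : v.toNat < xs.length) : PySem.List.pySet? xs v a = some (xs.set v.toNat a) := by
  have h2 := PySem.List.pySet?_natCast xs v.toNat a h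
  rw [show ((v.toNat : Nat) : Int) = v by omega] at h2
  exact h2

theorem pvSetSelf {α : Type} (xs : List α) (d : α) (n : Nat) (a : α) (h : n < xs.length) :
    (xs.set n a).getD n d = a := by
  simp [List.getD_eq_getElem?_getD, h]

theorem pvSetNe {α : Type} (xs : List α) (d : α) (n m : Nat) (a : α) (h : m ≠ n) :
    (xs.set n a).getD m d = xs.getD m d := by
  simp [List.getD_eq_getElem?_getD, List.getElem?_set_ne (Ne.symm h)]

theorem pvRepGetD {α : Type} (n v : Nat) (c d : α) (h : v < n) :
    (List.replicate n c).getD v d = c := by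
  simp [List.getD_eq_getElem?_getD, h]

-- § the parent map: chains, minimal chains, reachability, depth

theorem pv_zero_absorb (P : List Int) : ∀ j : Nat, (pvParP P)^[j] (0 : Int) = 0 := by
  intro j
  induction j with
  | zero => rfl
  | succ j ih =>
    rw [Function.iterate_succ_apply', ih]
    unfold pvParP
    rw [if_neg (by omega)]

theorem pv_dead (P : List Int) {x : Int} (hx : ¬ (1 ≤ x ∧ x ≤ (P.length : Int))) :
    ∀ j : Nat, 1 ≤ j → (pvParP P)^[j] x = 0 := by
  intro j hj
  obtain ⟨j, rfl⟩ : ∃ j', j = j' + 1 := ⟨j - 1, by omega⟩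
  rw [Function.iterate_succ_apply]
  rw [show pvParP P x = 0 from by unfold pvParP; rw [if_neg hx]]
  exact pv_zero_absorb P j

-- a minimal chain to the root visits pairwise distinct nodes
theorem pv_iter_ne (P : List Int) (v : Int) (j0 : Nat)
    (h1 : (pvParP P)^[j0] v = 1) (hmin : ∀ t, t < j0 → (pvParP P)^[t] v ≠ 1) :
    ∀ s t : Nat, s < t → t ≤ j0 → (pvParP P)^[s] v ≠ (pvParP P)^[t] v := by
  intro s t hst htj heq
  have hkey : (pvParP P)^[s + (j0 - t)] v = 1 := by
    rw [Nat.add_comm, Function.iterate_add_apply, heq, ← Function.iterate_add_apply]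
    rw [show j0 - t + t = j0 by omega]
    exact h1
  exact hmin (s + (j0 - t)) (by omega) hkey

-- every node of a minimal chain before the root lies in 1..len(P)
theorem pv_chain_mem (P : List Int) (v : Int) (j0 : Nat)
    (h1 : (pvParP P)^[j0] v = 1) :
    ∀ t, t < j0 → 1 ≤ (pvParP P)^[t] v ∧ (pvParP P)^[t] v ≤ (P.length : Int) := by
  intro t ht
  by_contra hx
  have hz : (pvParP P)^[j0 - t] ((pvParP P)^[t] v) = 0 :=
    pv_dead P hx (j0 - t) (by omega)
  rw [← Function.iterate_add_apply, show j0 - t + t = j0 by omega, h1] at hz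
  omega

theorem pv_min_le_len (P : List Int) (v : Int) (j0 : Nat)
    (h1 : (pvParP P)^[j0] v = 1) (hmin : ∀ t, t < j0 → (pvParP P)^[t] v ≠ 1) :
    j0 ≤ P.length := by
  rcases Nat.eq_zero_or_pos j0 with rfl | hj0
  · omega
  · have hinj : Set.InjOn (fun t => (pvParP P)^[t] v) (Finset.range j0) := by
      intro s hs t ht heq
      simp only [Finset.coe_range, Set.mem_Iio] at hs ht
      rcases lt_trichotomy s t with hlt | he | hlt
      · exact absurd heq (pv_iter_ne P v j0 h1 hmin s t hlt (by omega))
      · exact he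
      · exact absurd heq.symm (pv_iter_ne P v j0 h1 hmin t s hlt (by omega))
    have hmaps : ∀ t ∈ Finset.range j0,
        (pvParP P)^[t] v ∈ Finset.Icc (1 : Int) (P.length : Int) := by
      intro t ht
      rw [Finset.mem_range] at ht
      have := pv_chain_mem P v j0 h1 t ht
      rw [Finset.mem_Icc]
      exact this
    have hcard := Finset.card_le_card_of_injOn _ hmaps hinj
    rw [Finset.card_range] at hcard
    have : (Finset.Icc (1 : Int) (P.length : Int)).card = P.length := by
      rw [Int.card_Icc]
      omega
    omega

def pvReach (P : List Int) (v : Int) : Prop := ∃ j : Nat, (pvParP P)^[j] v = 1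

-- every reachable node has a minimal chain of length ≤ len(P)
theorem pvReach_min {P : List Int} {v : Int} (h : pvReach P v) :
    ∃ j0 : Nat, j0 ≤ P.length ∧ (pvParP P)^[j0] v = 1 ∧
      ∀ t, t < j0 → (pvParP P)^[t] v ≠ 1 := by
  refine ⟨Nat.find h, ?_, Nat.find_spec h, fun t ht => Nat.find_min h ht⟩
  exact pv_min_le_len P v _ (Nat.find_spec h) (fun t ht => Nat.find_min h ht)

-- the depth of a reachable node: length of the minimal chain to node 1
def pvDep (P : List Int) (v : Int) : Nat :=
  if h : ∃ j : Nat, j < P.length + 1 ∧ (pvParP P)^[j] v = 1 then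
    Nat.find (⟨h.choose, h.choose_spec.2⟩ : ∃ j : Nat, (pvParP P)^[j] v = 1)
  else 0

theorem pvDep_spec {P : List Int} {v : Int} (h : pvReach P v) :
    (pvParP P)^[pvDep P v] v = 1 ∧ (∀ t, t < pvDep P v → (pvParP P)^[t] v ≠ 1) ∧
      pvDep P v ≤ P.length := by
  obtain ⟨j0, hj0l, hj0, hj0m⟩ := pvReach_min h
  have hex : ∃ j : Nat, j < P.length + 1 ∧ (pvParP P)^[j] v = 1 := ⟨j0, by omega, hj0⟩
  unfold pvDep
  rw [dif_pos hex]
  have H : ∃ j : Nat, (pvParP P)^[j] v = 1 := ⟨j0, hj0⟩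
  exact ⟨Nat.find_spec H, fun t ht => Nat.find_min H ht,
    pv_min_le_len P v _ (Nat.find_spec H) (fun t ht => Nat.find_min H ht)⟩

theorem pvDep_one (P : List Int) : pvDep P 1 = 0 := by
  have hex : ∃ j : Nat, j < P.length + 1 ∧ (pvParP P)^[j] (1 : Int) = 1 := ⟨0, by omega, rfl⟩
  unfold pvDep
  rw [dif_pos hex]
  have H : ∃ j : Nat, (pvParP P)^[j] (1 : Int) = 1 := ⟨0, rfl⟩
  exact (Nat.find_eq_zero H).2 rfl


-- § consequences of the precondition

theorem pv_pre_facts {N : Int} {A P : List Int} (h : Pre_bestNode N A P) :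
    1 ≤ N ∧ 1 ≤ (A.length : Int) ∧
      (∀ j : Nat, 1 ≤ j → (pvParP P)^[j] 1 ≠ 1) ∧
      (∀ v : Int, pvReach P v → 1 ≤ v ∧ v ≤ N ∧ v ≤ (A.length : Int)) := by
  obtain ⟨hN, hA, hcycB, hbnd⟩ := h
  have hcyc : ∀ j : Nat, 1 ≤ j → (pvParP P)^[j] 1 ≠ 1 := by
    intro j hj hval
    -- a return to the root yields a minimal chain from par(1), of length ≤ len(P)
    have hr : pvReach P (pvParP P 1) := by
      refine ⟨j - 1, ?_⟩
      have he : (pvParP P)^[j - 1] (pvParP P 1) = (pvParP P)^[j] 1 := by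
        rw [← Function.iterate_succ_apply]
        simp only [Nat.succ_eq_add_one]
        rw [show j - 1 + 1 = j by omega]
      rw [he]
      exact hval
    obtain ⟨j0, hj0l, hj0, _⟩ := pvReach_min hr
    have : (pvParP P)^[j0 + 1] 1 = 1 := by
      rw [Function.iterate_succ_apply]
      exact hj0
    exact hcycB (j0 + 1) (by rw [List.mem_range]; omega) (by omega) this
  refine ⟨hN, hA, hcyc, ?_⟩
  intro v hv
  by_cases hv1 : v = 1
  · subst hv1; omega
  · obtain ⟨j0, hj0l, hj0, hj0m⟩ := pvReach_min hv
    have hj0p : 1 ≤ j0 := by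
      rcases Nat.eq_zero_or_pos j0 with rfl | hp
      · exact absurd (by simpa using hj0) hv1
      · exact hp
    have hvb : 1 ≤ v ∧ v ≤ (P.length : Int) := by
      have := pv_chain_mem P v j0 hj0 0 (by omega)
      simpa using this
    have := hbnd v (PySem.List.mem_pyRange_one.2 ⟨hvb.1, by omega⟩)
      ⟨j0, by rw [List.mem_range]; omega, hj0⟩
    exact ⟨hvb.1, this.1, this.2⟩

-- no node of the root's component lies on a parent cycle
theorem pv_no_cycle {N : Int} {A P : List Int} (h : Pre_bestNode N A P) {u : Int}
    (hr : pvReach P u) : ∀ m : Nat, 1 ≤ m → (pvParP P)^[m] u ≠ u := by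
  obtain ⟨-, -, hcyc, -⟩ := pv_pre_facts h
  intro m hm hval
  obtain ⟨k, hk⟩ := hr
  have h1 : (pvParP P)^[m] 1 = 1 := by
    calc (pvParP P)^[m] 1 = (pvParP P)^[m] ((pvParP P)^[k] u) := by rw [hk]
      _ = (pvParP P)^[m + k] u := by rw [Function.iterate_add_apply]
      _ = (pvParP P)^[k + m] u := by rw [Nat.add_comm]
      _ = (pvParP P)^[k] ((pvParP P)^[m] u) := by rw [Function.iterate_add_apply]
      _ = 1 := by rw [hval, hk]
  exact hcyc m hm h1

-- § children (canonical): the i in 1..len(P) with P[i-1] = u, ascending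

def pvKids (P : List Int) (u : Int) : List Int :=
  ((PySem.List.enumerate P 1).filter (fun pr => pr.2 == u)).map (fun pr => pr.1)

theorem mem_pvKids (P : List Int) (u i : Int) :
    i ∈ pvKids P u ↔ 1 ≤ i ∧ i ≤ (P.length : Int) ∧ PySem.List.pyGetD P (i - 1) 0 = u := by
  unfold pvKids
  simp only [List.mem_map, List.mem_filter]
  constructor
  · rintro ⟨pr, ⟨hmem, hval⟩, hfst⟩
    rw [PySem.List.mem_enumerate_iff] at hmem
    obtain ⟨k, hk, rfl⟩ := hmem
    simp only at hfst hval
    have hval' : P[k] = u := by simpa using hval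
    subst hfst
    refine ⟨by omega, by omega, ?_⟩
    rw [show ((1 : Int) + k - 1) = (k : Int) by ring, PySem.List.pyGetD_natCast]
    simp [List.getD_eq_getElem?_getD, List.getElem?_eq_getElem hk, hval']
  · rintro ⟨h1, h2, h3⟩
    refine ⟨(i, u), ⟨?_, by simp⟩, rfl⟩
    rw [PySem.List.mem_enumerate_iff]
    refine ⟨(i - 1).toNat, by omega, ?_⟩
    rw [show (i - 1) = (((i - 1).toNat : Nat) : Int) by omega, PySem.List.pyGetD_natCast] at h3
    have hlt : (i - 1).toNat < P.length := by omega
    rw [List.getD_eq_getElem?_getD, List.getElem?_eq_getElem hlt] at h3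
    simp only [Option.getD_some] at h3
    have h4 : (1 : Int) + ((i - 1).toNat : Int) = i := by omega
    rw [h4, h3]

theorem pvKids_pairwise (P : List Int) (u : Int) : (pvKids P u).Pairwise (· < ·) := by
  unfold pvKids
  have hp : ((PySem.List.enumerate P 1).filter (fun pr => pr.2 == u)).Pairwise
      (fun p q => p.1 < q.1) :=
    (PySem.List.pairwise_lt_enumerate P 1).sublist List.filter_sublist
  exact List.pairwise_map.2 hp

theorem pvKids_nodup (P : List Int) (u : Int) : (pvKids P u).Nodup :=
  (pvKids_pairwise P u).imp fun h => ne_of_lt h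

theorem pvKids_par {P : List Int} {u c : Int} (hc : c ∈ pvKids P u) : pvParP P c = u := by
  rw [mem_pvKids] at hc
  unfold pvParP
  rw [if_pos ⟨hc.1, hc.2.1⟩]
  exact hc.2.2

-- a kid of a reachable node is reachable, one level deeper, and is not the root
theorem pvKids_reach {N : Int} {A P : List Int} (h : Pre_bestNode N A P) {u c : Int}
    (hr : pvReach P u) (hc : c ∈ pvKids P u) :
    pvReach P c ∧ c ≠ 1 ∧ 1 ≤ c ∧ c ≤ N ∧ c ≤ (A.length : Int) ∧
      pvDep P c = pvDep P u + 1 := by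
  have hpc : pvParP P c = u := pvKids_par hc
  obtain ⟨k, hk⟩ := id hr
  have hrc : pvReach P c := ⟨k + 1, by rw [Function.iterate_succ_apply, hpc]; exact hk⟩
  have hc1 : c ≠ 1 := by
    intro hc1
    subst hc1
    obtain ⟨j0, _, hj0, _⟩ := pvReach_min hr
    have : (pvParP P)^[j0 + 1] 1 = 1 := by
      rw [Function.iterate_succ_apply, hpc]
      exact hj0
    exact (pv_pre_facts h).2.2.1 (j0 + 1) (by omega) this
  have hsc := pvDep_spec hrc
  have hsu := pvDep_spec hr
  have hbnds := (pv_pre_facts h).2.2.2 c hrc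
  refine ⟨hrc, hc1, hbnds.1, hbnds.2.1, hbnds.2.2, ?_⟩
  -- d(c) ≥ 1 and the tail of c's minimal chain is a chain for u
  have hdc1 : 1 ≤ pvDep P c := by
    rcases Nat.eq_zero_or_pos (pvDep P c) with hz | hp
    · exact absurd (by rw [← hsc.1, hz]; rfl) hc1
    · exact hp
  have htail : (pvParP P)^[pvDep P c - 1] u = 1 := by
    have := hsc.1
    rw [show pvDep P c = (pvDep P c - 1) + 1 by omega, Function.iterate_succ_apply, hpc]
      at this
    exact this
  have hle1 : pvDep P u ≤ pvDep P c - 1 := by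
    by_contra hgt
    exact absurd htail (hsu.2.1 (pvDep P c - 1) (by omega))
  have hle2 : pvDep P c ≤ pvDep P u + 1 := by
    by_contra hgt
    exact hsc.2.1 (pvDep P u + 1) (by omega)
      (by rw [Function.iterate_succ_apply, hpc]; exact hsu.1)
  omega

-- § subtree membership (descendants along the parent map)

def pvSub (P : List Int) (u v : Int) : Prop := ∃ k : Nat, (pvParP P)^[k] v = u

theorem pvSub_refl (P : List Int) (u : Int) : pvSub P u u := ⟨0, rfl⟩

theorem pvSub_of_par (P : List Int) {u c v : Int} (hc : pvParP P c = u) (hs : pvSub P c v) :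
    pvSub P u v := by
  obtain ⟨k, hk⟩ := hs
  exact ⟨k + 1, by rw [Function.iterate_succ_apply', hk, hc]⟩

theorem pvSub_reach {P : List Int} {u v : Int} (hr : pvReach P u) (hs : pvSub P u v) :
    pvReach P v := by
  obtain ⟨k, hk⟩ := hs
  obtain ⟨j, hj⟩ := hr
  exact ⟨j + k, by rw [Function.iterate_add_apply, hk]; exact hj⟩

theorem pvSub_cases {N : Int} {A P : List Int} (h : Pre_bestNode N A P) {u v : Int}
    (hr : pvReach P u) :
    pvSub P u v ↔ v = u ∨ ∃ c ∈ pvKids P u, pvSub P c v := by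
  have hu1 : 1 ≤ u := ((pv_pre_facts h).2.2.2 u hr).1
  constructor
  · rintro ⟨k, hk⟩
    cases k with
    | zero => exact Or.inl (by simpa using hk)
    | succ k =>
      right
      rw [Function.iterate_succ_apply'] at hk
      set c := (pvParP P)^[k] v with hc
      refine ⟨c, ?_, ⟨k, rfl⟩⟩
      have hcb : 1 ≤ c ∧ c ≤ (P.length : Int) := by
        by_contra hx
        rw [show pvParP P c = 0 from by unfold pvParP; rw [if_neg hx]] at hk
        omega
      rw [mem_pvKids]
      refine ⟨hcb.1, hcb.2, ?_⟩
      unfold pvParP at hk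
      rw [if_pos hcb] at hk
      exact hk
  · rintro (rfl | ⟨c, hc, hsub⟩)
    · exact pvSub_refl P v
    · exact pvSub_of_par P (pvKids_par hc) hsub

theorem pvKid_not_sub {N : Int} {A P : List Int} (h : Pre_bestNode N A P) {u c : Int}
    (hr : pvReach P u) (hc : c ∈ pvKids P u) : ¬ pvSub P c u := by
  rintro ⟨k, hk⟩
  have : (pvParP P)^[k + 1] u = u := by
    rw [Function.iterate_succ_apply', hk, pvKids_par hc]
  exact pv_no_cycle h hr (k + 1) (by omega) this

theorem pvKids_disj {N : Int} {A P : List Int} (h : Pre_bestNode N A P) {u c1 c2 v : Int}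
    (hr : pvReach P u) (hc1 : c1 ∈ pvKids P u) (hc2 : c2 ∈ pvKids P u) (hne : c1 ≠ c2)
    (h1 : pvSub P c1 v) (h2 : pvSub P c2 v) : False := by
  obtain ⟨k1, hk1⟩ := h1
  obtain ⟨k2, hk2⟩ := h2
  have key : ∀ (a b : Nat) (x y : Int), a < b → (pvParP P)^[a] v = x →
      (pvParP P)^[b] v = y → x ∈ pvKids P u → y ∈ pvKids P u → False := by
    intro a b x y hab hx hy hxm hym
    have hyx : (pvParP P)^[b - a] x = y := by
      rw [← hx, ← Function.iterate_add_apply, show b - a + a = b by omega]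
      exact hy
    have hcy : (pvParP P)^[b - a] u = u := by
      calc (pvParP P)^[b - a] u = (pvParP P)^[b - a] (pvParP P x) := by rw [pvKids_par hxm]
        _ = (pvParP P)^[(b - a) + 1] x := by rw [Function.iterate_succ_apply]
        _ = pvParP P ((pvParP P)^[b - a] x) := by rw [Function.iterate_succ_apply']
        _ = pvParP P y := by rw [hyx]
        _ = u := pvKids_par hym
    exact pv_no_cycle h hr (b - a) (by omega) hcy
  rcases lt_trichotomy k1 k2 with hlt | he | hlt
  · exact key k1 k2 c1 c2 hlt hk1 hk2 hc1 hc2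
  · exact hne (by rw [← hk1, ← hk2, he])
  · exact key k2 k1 c2 c1 hlt hk2 hk1 hc2 hc1

-- all nodes of the root's component lie in 1..N, and the depth stays below N
theorem pvDep_lt {N : Int} {A P : List Int} (h : Pre_bestNode N A P) {u : Int}
    (hr : pvReach P u) : pvDep P u < N.toNat := by
  obtain ⟨hN, hA, hcyc, hbnd⟩ := pv_pre_facts h
  obtain ⟨hit, hmin, hlen⟩ := pvDep_spec hr
  set j0 := pvDep P u with hj0
  have hinj : Set.InjOn (fun t => (pvParP P)^[t] u) (Finset.range (j0 + 1)) := by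
    intro s hs t ht heq
    simp only [Finset.coe_range, Set.mem_Iio] at hs ht
    rcases lt_trichotomy s t with hlt | he | hlt
    · exact absurd heq (pv_iter_ne P u j0 hit hmin s t hlt (by omega))
    · exact he
    · exact absurd heq.symm (pv_iter_ne P u j0 hit hmin t s hlt (by omega))
  have hmaps : ∀ t ∈ Finset.range (j0 + 1),
      (pvParP P)^[t] u ∈ Finset.Icc (1 : Int) N := by
    intro t ht
    rw [Finset.mem_range] at ht
    have hrt : pvReach P ((pvParP P)^[t] u) := by
      refine ⟨j0 - t, ?_⟩
      rw [← Function.iterate_add_apply, show j0 - t + t = j0 by omega]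
      exact hit
    have := hbnd _ hrt
    rw [Finset.mem_Icc]
    exact ⟨this.1, this.2.1⟩
  have hcard := Finset.card_le_card_of_injOn _ hmaps hinj
  rw [Finset.card_range] at hcard
  have : (Finset.Icc (1 : Int) N).card = N.toNat := by
    rw [Int.card_Icc]
    omega
  omega


-- § the alternating value of a reachable node (fuel-based; stable once the fuel
-- exceeds N - depth, which bounds the remaining height of the subtree)

def pvBV (A P : List Int) : Nat → Int → Int → Int
  | 0, _, _ => 0
  | f + 1, s, u =>
    let a := s * PySem.List.pyGetD A (u - 1) 0
    if pvKids P u = [] then a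
    else (pvKids P u).foldl (fun ans c => max ans (a + pvBV A P f (-s) c)) (-10 ^ 6)

theorem pvBV_stab {N : Int} {A P : List Int} (h : Pre_bestNode N A P) :
    ∀ (m : Nat) (u : Int) (f g : Nat) (s : Int), pvReach P u →
      N.toNat - pvDep P u ≤ m → N.toNat - pvDep P u < f → N.toNat - pvDep P u < g →
      pvBV A P f s u = pvBV A P g s u := by
  intro m
  induction m with
  | zero =>
    intro u f g s hr hm hf hg
    have := pvDep_lt h hr
    omega
  | succ m ih =>
    intro u f g s hr hm hf hg
    obtain ⟨f, rfl⟩ : ∃ f', f = f' + 1 := ⟨f - 1, by omega⟩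
    obtain ⟨g, rfl⟩ : ∃ g', g = g' + 1 := ⟨g - 1, by omega⟩
    simp only [pvBV]
    by_cases hk : pvKids P u = []
    · simp [hk]
    · rw [if_neg hk, if_neg hk]
      apply PySem.List.foldl_congr_mem
      intro acc c hc
      have hkr := pvKids_reach h hr hc
      have hdc := pvDep_lt h hkr.1
      rw [ih c f g (-s) hkr.1 (by omega) (by omega) (by omega)]

def pvV (N : Int) (A P : List Int) (s u : Int) : Int := pvBV A P (N.toNat + 1) s u

theorem pvV_leaf {N : Int} {A P : List Int} (s : Int) {u : Int}
    (hk : pvKids P u = []) : pvV N A P s u = s * PySem.List.pyGetD A (u - 1) 0 := by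
  simp [pvV, pvBV, hk]

theorem pvV_node {N : Int} {A P : List Int} (h : Pre_bestNode N A P) (s : Int) {u : Int}
    (hr : pvReach P u) (hk : pvKids P u ≠ []) :
    pvV N A P s u = (pvKids P u).foldl
      (fun ans c => max ans (s * PySem.List.pyGetD A (u - 1) 0 + pvV N A P (-s) c))
      (-10 ^ 6) := by
  show pvBV A P (N.toNat + 1) s u = _
  simp only [pvBV]
  rw [if_neg hk]
  apply PySem.List.foldl_congr_mem
  intro acc c hc
  have hkr := pvKids_reach h hr hc
  have hdc := pvDep_lt h hkr.1
  rw [pvBV_stab h (N.toNat - pvDep P c) c N.toNat (N.toNat + 1) (-s) hkr.1 (by omega)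
    (by omega) (by omega)]
  rfl

-- § ±1 sign of a depth difference

def pvSgn (k : Int) : Int := if k % 2 = 0 then 1 else -1

theorem pvSgn_zero : pvSgn 0 = 1 := rfl

theorem pvSgn_succ (k : Int) : pvSgn (k + 1) = -pvSgn k := by
  rcases Int.emod_two_eq k with h | h
  · have h2 : (k + 1) % 2 = 1 := by omega
    simp [pvSgn, h, h2]
  · have h2 : (k + 1) % 2 = 0 := by omega
    simp [pvSgn, h, h2]

-- § A's children defaultdict computes pvKids

theorem enum_map (P : List Int) :
    PySem.List.enumerate P 1 =
      (PySem.List.pyRange 1 ((P.length : Int) + 1) 1).map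
        (fun i => (i, PySem.List.pyGetD P (i - 1) 0)) := by
  apply List.ext_getElem
  · simp [PySem.List.length_enumerate, PySem.List.length_pyRange_one]
  · intro k h1 h2
    have hk : k < P.length := by
      simpa [PySem.List.length_enumerate] using h1
    rw [PySem.List.getElem_enumerate, List.getElem_map, PySem.List.getElem_pyRange_one]
    have h4 : (1 : Int) + (k : Int) - 1 = (k : Int) := by ring
    rw [h4, PySem.List.pyGetD_natCast]
    rw [List.getD_eq_getElem?_getD, List.getElem?_eq_getElem hk]
    rfl

theorem childrenA_eq (P : List Int) :
    pvChildrenA P = (PySem.List.enumerate P 1).foldl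
      (fun d pr => if pr.2 = -1 then d else d.modify pr.2 [] (fun l => l ++ [pr.1]))
      PySem.Dict.empty := by
  unfold pvChildrenA
  rw [enum_map, List.foldl_map]

theorem childrenA_swap (P : List Int) :
    pvChildrenA P =
      ((((PySem.List.enumerate P 1).filter (fun pr => decide (pr.2 ≠ -1))).map Prod.swap).foldl
        (fun d p => d.modify p.1 [] (fun t => t ++ [p.2])) PySem.Dict.empty) := by
  rw [childrenA_eq]
  have hbody : (fun (d : PySem.Dict Int (List Int)) (pr : Int × Int) =>
      if pr.2 = -1 then d else d.modify pr.2 [] (fun l => l ++ [pr.1]))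
      = fun d pr => if pr.2 ≠ -1 then d.modify pr.2 [] (fun l => l ++ [pr.1]) else d := by
    funext d pr; rw [ite_not]
  rw [hbody, PySem.List.foldl_ite_eq_foldl_filter, List.foldl_map]
  rfl

theorem childrenA_getD (P : List Int) (u : Int) (hu : u ≠ -1) :
    (pvChildrenA P).getD u [] = pvKids P u := by
  rw [childrenA_swap, PySem.Dict.getD_foldl_modify_append, PySem.Dict.getD_empty]
  rw [List.filter_map, List.filter_filter, List.map_map]
  unfold pvKids
  have hpred : ∀ pr : Int × Int, pr ∈ PySem.List.enumerate P 1 →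
      ((((fun p : Int × Int => p.1 == u) ∘ Prod.swap) pr && decide (pr.2 ≠ -1)) = (pr.2 == u)) := by
    intro pr _
    by_cases hx : pr.2 = u
    · simp [Function.comp, Prod.swap, hx, hu]
    · simp [Function.comp, Prod.swap, hx]
  rw [List.filter_congr hpred, List.nil_append]
  exact List.map_congr_left (fun a _ => rfl)

theorem childrenA_contains (P : List Int) (u : Int) (hu : u ≠ -1) :
    ((pvChildrenA P).contains u = true) ↔ pvKids P u ≠ [] := by
  constructor
  · intro hc
    rw [childrenA_swap] at hc
    rw [PySem.Dict.contains_iff_mem_keys, PySem.Dict.keys_foldl_modify_key,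
      PySem.Dict.keys_empty] at hc
    rw [PySem.Set.mem_update] at hc
    rcases hc with hc | hc
    · exact absurd hc List.not_mem_nil
    · rw [List.map_map] at hc
      obtain ⟨pr, hpr, hpr1⟩ := List.mem_map.1 hc
      rw [List.mem_filter] at hpr
      have h2u : pr.2 = u := by simpa [Prod.swap] using hpr1
      have hmem : pr.1 ∈ pvKids P u := by
        unfold pvKids
        exact List.mem_map.2 ⟨pr, List.mem_filter.2 ⟨hpr.1, by simp [h2u]⟩, rfl⟩
      intro hnil
      rw [hnil] at hmem
      exact List.not_mem_nil hmem
  · intro hk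
    by_contra hc
    have hc' : (pvChildrenA P).contains u = false := by
      simpa using hc
    have h0 : (pvChildrenA P).getD u [] = [] :=
      PySem.Dict.getD_of_not_contains _ _ hc'
    rw [childrenA_getD P u hu] at h0
    exact hk h0


-- § A's recursion: mul/next-sign bookkeeping

def pvMul (sg : Int) : Int := if sg = 1 then 1 else -1
def pvNxt (sg : Int) : Int := if sg = 1 then (0 : Int) else 1

theorem pvMul_nxt (sg : Int) : pvMul (pvNxt sg) = -pvMul sg := by
  unfold pvMul pvNxt
  by_cases hs : sg = 1 <;> simp [hs]

-- § A's memoized DFS computes pvV and fills dp exactly on the subtree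

theorem A_main {N : Int} {A P : List Int} (h : Pre_bestNode N A P) :
    ∀ (f : Nat) (sg u : Int) (dp : List Int), pvReach P u →
      N.toNat - pvDep P u < f →
      dp.length = (N + 1).toNat →
      (∀ v : Int, pvSub P u v → dp.getD v.toNat 0 = -1) →
      ∃ dp' : List Int,
        bestValueA f u dp (pvChildrenA P) A sg = some (pvV N A P (pvMul sg) u, dp') ∧
        dp'.length = (N + 1).toNat ∧
        (∀ v : Int, pvSub P u v →
          dp'.getD v.toNat 0 =
            pvV N A P (pvMul sg * pvSgn ((pvDep P v : Int) - (pvDep P u : Int))) v) ∧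
        (∀ w : Nat, (∀ v : Int, pvSub P u v → v.toNat ≠ w) →
          dp'.getD w 0 = dp.getD w 0) := by
  obtain ⟨hN, hA1, hcyc, hbnd⟩ := pv_pre_facts h
  intro f
  induction f with
  | zero =>
    intro sg u dp hr hf
    have := pvDep_lt h hr
    omega
  | succ f ihf =>
    intro sg u dp hr hf hlen hinit
    obtain ⟨h1, h2, h2A⟩ := hbnd u hr
    have hgetdp : PySem.List.pyGet? dp u = some (dp.getD u.toNat 0) :=
      pvGetSome dp 0 u (by omega) (by omega)
    have hdpu : dp.getD u.toNat 0 = -1 := hinit u (pvSub_refl P u)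
    have hdpu' : dp[u.toNat]?.getD 0 = -1 := by
      rw [← List.getD_eq_getElem?_getD]
      exact hdpu
    have hgetA : PySem.List.pyGet? A (u - 1) = some (A.getD (u - 1).toNat 0) :=
      pvGetSome A 0 (u - 1) (by omega) (by omega)
    have ha2 : PySem.List.pyGetD A (u - 1) 0 = A.getD (u - 1).toNat 0 := by
      rw [PySem.List.pyGetD_eq_getElem A (i := u - 1) 0 (by omega) (by omega)]
      rw [List.getD_eq_getElem?_getD, List.getElem?_eq_getElem (by omega)]
      rfl
    set a := A.getD (u - 1).toNat 0 with hadef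
    have hm1 : (if sg = 1 then ((1 : Int), (0 : Int)) else (-1, 1)).1 = pvMul sg := by
      unfold pvMul
      by_cases hs : sg = 1 <;> simp [hs]
    have hm2 : (if sg = 1 then ((1 : Int), (0 : Int)) else (-1, 1)).2 = pvNxt sg := by
      unfold pvNxt
      by_cases hs : sg = 1 <;> simp [hs]
    have hchild : (pvChildrenA P).getD u [] = pvKids P u := childrenA_getD P u (by omega)
    by_cases hk : pvKids P u = []
    · -- leaf: dp[u] := value
      have hcont : (pvChildrenA P).contains u = false := by
        cases hcb : (pvChildrenA P).contains u
        · rfl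
        · exact absurd ((childrenA_contains P u (by omega)).1 hcb) (by simp [hk])
      have hval : pvV N A P (pvMul sg) u = a * pvMul sg := by
        rw [pvV_leaf _ hk, ha2, mul_comm]
      have hsubeq : ∀ v : Int, pvSub P u v → v = u := by
        intro v hs
        rcases (pvSub_cases h hr).1 hs with rfl | ⟨c, hc, _⟩
        · rfl
        · rw [hk] at hc
          exact absurd hc List.not_mem_nil
      refine ⟨dp.set u.toNat (a * pvMul sg), ?_, by simp [hlen], ?_, ?_⟩
      · simp [bestValueA, hgetdp, hdpu', hgetA, hcont, hm1, hval]
      · intro v hs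
        have hv := hsubeq v hs
        subst hv
        rw [pvSetSelf _ _ _ _ (by omega)]
        rw [sub_self, pvSgn_zero, mul_one, hval]
      · intro w hw
        exact pvSetNe _ _ _ _ _ (fun hwe => hw u (pvSub_refl P u) hwe.symm)
    · -- internal node: fold over the kids, then dp[u] := ans
      have hcont : (pvChildrenA P).contains u = true :=
        (childrenA_contains P u (by omega)).2 hk
      have inner : ∀ ks : List Int, ks.Nodup → (∀ c ∈ ks, c ∈ pvKids P u) →
          ∀ (ans : Int) (dp2 : List Int), dp2.length = (N + 1).toNat →
          (∀ c ∈ ks, ∀ v : Int, pvSub P c v → dp2.getD v.toNat 0 = -1) →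
          ∃ dpF : List Int,
            ks.foldl (fun acc element => acc.bind fun p =>
                (bestValueA f element p.2 (pvChildrenA P) A (pvNxt sg)).bind fun q =>
                  some (max p.1 (a * pvMul sg + q.1), q.2))
              (some (ans, dp2)) =
              some (ks.foldl
                (fun an c => max an (a * pvMul sg + pvV N A P (-pvMul sg) c)) ans, dpF) ∧
            dpF.length = (N + 1).toNat ∧
            (∀ v : Int, ∀ c ∈ ks, pvSub P c v →
              dpF.getD v.toNat 0 =
                pvV N A P (pvMul sg * pvSgn ((pvDep P v : Int) - (pvDep P u : Int))) v) ∧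
            (∀ w : Nat, (∀ v : Int, (∃ c ∈ ks, pvSub P c v) → v.toNat ≠ w) →
              dpF.getD w 0 = dp2.getD w 0) := by
        intro ks
        induction ks with
        | nil =>
          intro _ _ ans dp2 hl hpre
          refine ⟨dp2, rfl, hl, ?_, fun w _ => rfl⟩
          intro v c hc
          exact absurd hc List.not_mem_nil
        | cons c t iht =>
          intro hnd hks ans dp2 hl hpre
          rw [List.nodup_cons] at hnd
          have hc0 : c ∈ pvKids P u := hks c List.mem_cons_self
          have hkr := pvKids_reach h hr hc0
          obtain ⟨dpc, heqc, hlc, hstc, hunc⟩ := ihf (pvNxt sg) c dp2 hkr.1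
            (by
              have := pvDep_lt h hkr.1
              omega) hl
            (fun v hs => hpre c List.mem_cons_self v hs)
          have hfresh : ∀ c' ∈ t, ∀ v : Int, pvSub P c' v →
              dpc.getD v.toNat 0 = -1 := by
            intro c' hc' v hs
            have hc'0 : c' ∈ pvKids P u := hks c' (List.mem_cons_of_mem _ hc')
            have hne : c ≠ c' := fun he => hnd.1 (he ▸ hc')
            have hvr := pvSub_reach (pvKids_reach h hr hc'0).1 hs
            have hvb := hbnd v hvr
            rw [hunc v.toNat ?_]
            · exact hpre c' (List.mem_cons_of_mem _ hc') v hs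
            · intro v2 hs2 he
              have hv2r := pvSub_reach hkr.1 hs2
              have hv2b := hbnd v2 hv2r
              have hv2e : v2 = v := by omega
              subst hv2e
              exact pvKids_disj h hr hc0 hc'0 hne hs2 hs
          obtain ⟨dpF, heqF, hlF, hstF, hunF⟩ :=
            iht hnd.2 (fun c' hc' => hks c' (List.mem_cons_of_mem _ hc'))
              (max ans (a * pvMul sg + pvV N A P (-pvMul sg) c)) dpc hlc hfresh
          refine ⟨dpF, ?_, hlF, ?_, ?_⟩
          · rw [List.foldl_cons, List.foldl_cons]
            rw [show ((some (ans, dp2)).bind fun p =>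
                (bestValueA f c p.2 (pvChildrenA P) A (pvNxt sg)).bind fun q =>
                  some (max p.1 (a * pvMul sg + q.1), q.2)) =
                some (max ans (a * pvMul sg + pvV N A P (-pvMul sg) c), dpc) from by
              rw [Option.bind_some]
              simp only [heqc, Option.bind_some]
              rw [pvMul_nxt]]
            exact heqF
          · intro v c' hc' hs
            rcases List.mem_cons.1 hc' with rfl | hc'
            · -- v lies in c's subtree; the later kids never touch it
              have hvr := pvSub_reach hkr.1 hs
              have hvb := hbnd v hvr
              rw [hunF v.toNat ?_]
              · rw [hstc v hs, pvMul_nxt]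
                have hlc' : ((pvDep P v : Int) - (pvDep P u : Int)) =
                    ((pvDep P v : Int) - (pvDep P c' : Int)) + 1 := by
                  rw [hkr.2.2.2.2.2]
                  push_cast
                  ring
                rw [hlc', pvSgn_succ]
                ring_nf
              · intro v2 hs2 he
                obtain ⟨c2, hc2m, hc2s⟩ := hs2
                have hc20 : c2 ∈ pvKids P u := hks c2 (List.mem_cons_of_mem _ hc2m)
                have hne : c2 ≠ c' := fun he2 => hnd.1 (he2 ▸ hc2m)
                have hv2r := pvSub_reach (pvKids_reach h hr hc20).1 hc2s
                have hv2b := hbnd v2 hv2r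
                have hv2e : v2 = v := by omega
                subst hv2e
                exact pvKids_disj h hr hc20 hc0 hne hc2s hs
            · exact hstF v c' hc' hs
          · intro w hw
            rw [hunF w (fun v ⟨c2, hc2, hs⟩ =>
              hw v ⟨c2, List.mem_cons_of_mem _ hc2, hs⟩)]
            rw [hunc w (fun v hs => hw v ⟨c, List.mem_cons_self, hs⟩)]
      obtain ⟨dpF, heqF, hlF, hstF, hunF⟩ := inner (pvKids P u) (pvKids_nodup P u)
        (fun c hc => hc) (-10 ^ 6) dp hlen
        (fun c hc v hs => hinit v ((pvSub_cases h hr).2 (Or.inr ⟨c, hc, hs⟩)))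
      have hANS : pvV N A P (pvMul sg) u = (pvKids P u).foldl
          (fun an c => max an (a * pvMul sg + pvV N A P (-pvMul sg) c)) (-10 ^ 6) := by
        rw [pvV_node h _ hr hk]
        apply PySem.List.foldl_congr_mem
        intro acc c _
        rw [ha2, mul_comm a (pvMul sg)]
      refine ⟨dpF.set u.toNat (pvV N A P (pvMul sg) u), ?_, by simp [hlF], ?_, ?_⟩
      · simp only [bestValueA, hgetdp, hdpu, hgetA, hcont, hm1, hm2, hchild,
          Bool.true_eq_false, heqF]
        rw [hANS]
        simp
      · intro v hs
        rcases (pvSub_cases h hr).1 hs with rfl | ⟨c, hc, hcs⟩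
        · rw [pvSetSelf _ _ _ _ (by omega), sub_self, pvSgn_zero, mul_one]
        · have hkr := pvKids_reach h hr hc
          have hvr := pvSub_reach hkr.1 hcs
          have hvb := hbnd v hvr
          have hvne : v ≠ u := by
            intro he
            subst he
            exact pvKid_not_sub h hr hc hcs
          rw [pvSetNe _ _ _ _ _ (by omega)]
          exact hstF v c hc hcs
      · intro w hw
        rw [pvSetNe _ _ _ _ _ (fun hwe => hw u (pvSub_refl P u) hwe.symm)]
        exact hunF w (fun v ⟨c, hc, hs⟩ =>
          hw v ((pvSub_cases h hr).2 (Or.inr ⟨c, hc, hs⟩)))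


-- § the preorder produced by the stack loop (kids visited in reverse order),
-- with the ±1 multiplier carried alongside

def pvPreS (P : List Int) : Nat → Int → Int → List (Int × Int)
  | 0, u, m => [(u, m)]
  | f + 1, u, m => (u, m) :: (pvKids P u).reverse.flatMap (fun c => pvPreS P f c (-m))

theorem pvPreS_stab {N : Int} {A P : List Int} (h : Pre_bestNode N A P) :
    ∀ (mm : Nat) (u m : Int) (f g : Nat), pvReach P u →
      N.toNat - pvDep P u ≤ mm → N.toNat - pvDep P u < f → N.toNat - pvDep P u < g →
      pvPreS P f u m = pvPreS P g u m := by
  intro mm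
  induction mm with
  | zero =>
    intro u m f g hr hm hf hg
    have := pvDep_lt h hr
    omega
  | succ mm ih =>
    intro u m f g hr hm hf hg
    obtain ⟨f, rfl⟩ : ∃ f', f = f' + 1 := ⟨f - 1, by omega⟩
    obtain ⟨g, rfl⟩ : ∃ g', g = g' + 1 := ⟨g - 1, by omega⟩
    simp only [pvPreS, List.cons.injEq, true_and]
    apply List.flatMap_congr
    intro c hc
    rw [List.mem_reverse] at hc
    have hkr := pvKids_reach h hr hc
    have := pvDep_lt h hkr.1
    exact ih c (-m) f g hkr.1 (by omega) (by omega) (by omega)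

def pvPre (N : Int) (P : List Int) (u m : Int) : List (Int × Int) :=
  pvPreS P (N.toNat + 1) u m

theorem pvPre_unfold {N : Int} {A P : List Int} (h : Pre_bestNode N A P) {u : Int}
    (m : Int) (hr : pvReach P u) :
    pvPre N P u m = (u, m) :: (pvKids P u).reverse.flatMap (fun c => pvPre N P c (-m)) := by
  show pvPreS P (N.toNat + 1) u m = _
  simp only [pvPreS, List.cons.injEq, true_and]
  apply List.flatMap_congr
  intro c hc
  rw [List.mem_reverse] at hc
  have hkr := pvKids_reach h hr hc
  have := pvDep_lt h hkr.1
  exact pvPreS_stab h (N.toNat - pvDep P c) c (-m) N.toNat (N.toNat + 1) hkr.1 (by omega)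
    (by omega) (by omega)

-- § multiplicity: each subtree node appears exactly once (as a pair with its multiplier)

theorem pv_sum_one (l : List Int) (cnt : Int → Nat) (c0 : Int) (h0 : c0 ∈ l)
    (h1 : cnt c0 = 1) (hz : ∀ c ∈ l, c ≠ c0 → cnt c = 0) (hn : l.Nodup) :
    (l.map cnt).sum = 1 := by
  induction l with
  | nil => simp at h0
  | cons c t ih =>
    rw [List.map_cons, List.sum_cons]
    rw [List.nodup_cons] at hn
    rcases List.mem_cons.1 h0 with rfl | h0t
    · rw [h1]
      have hzz : (t.map cnt).sum = 0 := by
        rw [List.sum_eq_zero]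
        intro x hx
        rw [List.mem_map] at hx
        obtain ⟨d, hd, rfl⟩ := hx
        exact hz d (by simp [hd]) (fun he => hn.1 (he ▸ hd))
      omega
    · rw [hz c (by simp) (fun he => hn.1 (he ▸ h0t))]
      rw [ih h0t (fun d hd => hz d (by simp [hd])) hn.2]

theorem pvSub_parent_of_ne {P : List Int} {c x : Int} (hs : pvSub P c x) (hne : x ≠ c) :
    pvSub P c (pvParP P x) := by
  obtain ⟨k, hk⟩ := hs
  cases k with
  | zero => exact absurd (by simpa using hk) hne
  | succ k =>
    rw [Function.iterate_succ_apply] at hk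
    exact ⟨k, hk⟩

-- the sign carried with a node is determined by its depth offset
def pvSnd (P : List Int) (u m v : Int) : Int :=
  m * pvSgn ((pvDep P v : Int) - (pvDep P u : Int))

theorem pvPre_count {N : Int} {A P : List Int} (h : Pre_bestNode N A P) :
    ∀ (mm : Nat) (u m : Int), pvReach P u → N.toNat - pvDep P u ≤ mm →
      ∀ v w : Int,
        (pvSub P u v ∧ w = pvSnd P u m v → (pvPre N P u m).count (v, w) = 1) ∧
        (¬ (pvSub P u v ∧ w = pvSnd P u m v) → (pvPre N P u m).count (v, w) = 0) := by
  intro mm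
  induction mm with
  | zero =>
    intro u m hr hm
    have := pvDep_lt h hr
    omega
  | succ mm ih =>
    intro u m hr hm v w
    rw [pvPre_unfold h m hr]
    rw [List.count_cons, List.count_flatMap]
    have key : ∀ c ∈ (pvKids P u).reverse,
        (pvSub P c v ∧ w = pvSnd P c (-m) v → (pvPre N P c (-m)).count (v, w) = 1) ∧
        (¬ (pvSub P c v ∧ w = pvSnd P c (-m) v) → (pvPre N P c (-m)).count (v, w) = 0) := by
      intro c hc
      rw [List.mem_reverse] at hc
      have hkr := pvKids_reach h hr hc
      have := pvDep_lt h hkr.1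
      exact ih c (-m) hkr.1 (by omega) v w
    have hsnd : ∀ c ∈ pvKids P u, pvSub P c v → pvSnd P c (-m) v = pvSnd P u m v := by
      intro c hc hs
      have hkr := pvKids_reach h hr hc
      unfold pvSnd
      rw [hkr.2.2.2.2.2]
      have hstep : ((pvDep P v : Int) - (pvDep P u : Int)) =
          ((pvDep P v : Int) - ((pvDep P u : Int) + 1)) + 1 := by ring
      push_cast
      rw [hstep, pvSgn_succ]
      ring
    constructor
    · rintro ⟨hs, rfl⟩
      rcases (pvSub_cases h hr).1 hs with rfl | ⟨c0, hc0, hsc0⟩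
      · have hz : (((pvKids P v).reverse).map
            (List.count (v, pvSnd P v m v) ∘ fun c => pvPre N P c (-m))).sum = 0 := by
          rw [List.sum_eq_zero]
          intro x hx
          rw [List.mem_map] at hx
          obtain ⟨c, hc, rfl⟩ := hx
          exact (key c hc).2 (fun hcc =>
            pvKid_not_sub h hr (List.mem_reverse.1 hc) hcc.1)
        rw [hz]
        have hself : ((v, m) == (v, pvSnd P v m v)) = true := by
          unfold pvSnd
          simp [sub_self, pvSgn_zero]
        rw [hself]
        rfl
      · have hvu : v ≠ u := by
          intro hvu
          exact pvKid_not_sub h hr hc0 (hvu ▸ hsc0)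
        rw [if_neg (by simp [Ne.symm hvu])]
        have hone := pv_sum_one (pvKids P u).reverse
          (fun c => (pvPre N P c (-m)).count (v, pvSnd P u m v)) c0
          (List.mem_reverse.2 hc0)
          ((key c0 (List.mem_reverse.2 hc0)).1 ⟨hsc0, (hsnd c0 hc0 hsc0).symm⟩)
          (fun c hcm hne => (key c hcm).2 (fun hcc =>
            hne (by
              by_contra hne2
              exact pvKids_disj h hr (List.mem_reverse.1 hcm) hc0 hne2 hcc.1 hsc0)))
          (List.nodup_reverse.2 (pvKids_nodup P u))
        rw [show (List.count (v, pvSnd P u m v) ∘ fun c => pvPre N P c (-m)) =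
          (fun c => (pvPre N P c (-m)).count (v, pvSnd P u m v)) from rfl]
        omega
    · intro hs
      have hz : (((pvKids P u).reverse).map
          (List.count (v, w) ∘ fun c => pvPre N P c (-m))).sum = 0 := by
        rw [List.sum_eq_zero]
        intro x hx
        rw [List.mem_map] at hx
        obtain ⟨c, hc, rfl⟩ := hx
        apply (key c hc).2
        rintro ⟨hsc, rfl⟩
        rw [List.mem_reverse] at hc
        exact hs ⟨(pvSub_cases h hr).2 (Or.inr ⟨c, hc, hsc⟩), (hsnd c hc hsc)⟩

      rw [hz]
      have hne : ((u, m) == (v, w)) = false := by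
        by_cases hvu : v = u
        · subst hvu
          have : w ≠ m := by
            intro he
            exact hs ⟨pvSub_refl P v, by unfold pvSnd; rw [sub_self, pvSgn_zero, mul_one, he]⟩
          simp [this.symm]
        · simp [Ne.symm hvu]
      rw [hne]
      rfl

theorem pvPre_mem {N : Int} {A P : List Int} (h : Pre_bestNode N A P) {u : Int}
    (m : Int) (hr : pvReach P u) (v w : Int) :
    (v, w) ∈ pvPre N P u m ↔ pvSub P u v ∧ w = pvSnd P u m v := by
  have hc := pvPre_count h (N.toNat - pvDep P u) u m hr (by omega) v w
  rw [← List.count_pos_iff]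
  by_cases hs : pvSub P u v ∧ w = pvSnd P u m v
  · rw [hc.1 hs]
    simp [hs]
  · rw [hc.2 hs]
    simp [hs]

theorem pvPre_nodup {N : Int} {A P : List Int} (h : Pre_bestNode N A P) {u : Int}
    (m : Int) (hr : pvReach P u) : (pvPre N P u m).Nodup := by
  rw [List.nodup_iff_count_le_one]
  intro p
  have hc := pvPre_count h (N.toNat - pvDep P u) u m hr (by omega) p.1 p.2
  by_cases hs : pvSub P u p.1 ∧ p.2 = pvSnd P u m p.1
  · rw [hc.1 hs]
  · rw [hc.2 hs]
    omega

-- in the preorder no node precedes its parent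
theorem pvPre_pairwise {N : Int} {A P : List Int} (h : Pre_bestNode N A P) :
    ∀ (mm : Nat) (u m : Int), pvReach P u → N.toNat - pvDep P u ≤ mm →
      (pvPre N P u m).Pairwise (fun x y => pvParP P x.1 ≠ y.1) := by
  obtain ⟨hN, hA1, hcyc, hbnd⟩ := pv_pre_facts h
  intro mm
  induction mm with
  | zero =>
    intro u m hr hm
    have := pvDep_lt h hr
    omega
  | succ mm ih =>
    intro u m hr hm
    rw [pvPre_unfold h m hr]
    rw [List.pairwise_cons]
    constructor
    · intro y hy
      rw [List.mem_flatMap] at hy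
      obtain ⟨c, hc, hyc⟩ := hy
      rw [List.mem_reverse] at hc
      have hkr := pvKids_reach h hr hc
      obtain ⟨y1, y2⟩ := y
      rw [pvPre_mem h (-m) hkr.1] at hyc
      intro hpar
      simp only at hpar
      -- par u is y1, but y1 lies in c's subtree, which cannot contain an ancestor of u
      have hsy : pvSub P c (pvParP P u) := hpar ▸ hyc.1
      obtain ⟨k, hk⟩ := hsy
      have hcyc2 : (pvParP P)^[k + 2] u = u := by
        have hpc : pvParP P c = u := pvKids_par hc
        calc (pvParP P)^[k + 2] u = (pvParP P)^[k + 1] (pvParP P u) := by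
              rw [Function.iterate_succ_apply]
          _ = pvParP P ((pvParP P)^[k] (pvParP P u)) := by rw [Function.iterate_succ_apply']
          _ = pvParP P c := by rw [hk]
          _ = u := hpc
      exact pv_no_cycle h hr (k + 2) (by omega) hcyc2
    · rw [List.pairwise_flatMap]
      constructor
      · intro c hc
        rw [List.mem_reverse] at hc
        have hkr := pvKids_reach h hr hc
        have := pvDep_lt h hkr.1
        exact ih c (-m) hkr.1 (by omega)
      · have hkn : (pvKids P u).reverse.Pairwise (fun c d => c ≠ d) :=
          (List.nodup_reverse.2 (pvKids_nodup P u)).imp (fun hx => hx)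
        apply hkn.imp_of_mem
        intro c d hcm hdm hne x hx y hy
        rw [List.mem_reverse] at hcm hdm
        have hgc := pvKids_reach h hr hcm
        have hgd := pvKids_reach h hr hdm
        obtain ⟨x1, x2⟩ := x
        obtain ⟨y1, y2⟩ := y
        rw [pvPre_mem h (-m) hgc.1] at hx
        rw [pvPre_mem h (-m) hgd.1] at hy
        intro hpar
        simp only at hpar
        by_cases hxc : x1 = c
        · subst hxc
          have hpc : pvParP P x1 = u := pvKids_par hcm
          rw [hpc] at hpar
          exact pvKid_not_sub h hr hdm (hpar ▸ hy.1)
        · have hsx : pvSub P c (pvParP P x1) := pvSub_parent_of_ne hx.1 hxc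
          rw [hpar] at hsx
          exact pvKids_disj h hr hcm hdm hne hsx hy.1


-- § B's children array: kids filtered to the existing nodes 1..N

theorem childrenB_len_aux (N : Int) (l : List (Int × Int)) :
    ∀ arr : List (List Int),
      (l.foldl (fun arr pr =>
        if 1 ≤ pr.2 ∧ pr.2 ≤ N ∧ pr.1 ≤ N then
          arr.set pr.2.toNat (arr.getD pr.2.toNat [] ++ [pr.1]) else arr) arr).length
      = arr.length := by
  induction l with
  | nil => intro arr; rfl
  | cons pr t ih =>
    intro arr
    rw [List.foldl_cons]
    by_cases hg : 1 ≤ pr.2 ∧ pr.2 ≤ N ∧ pr.1 ≤ N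
    · rw [if_pos hg, ih, List.length_set]
    · rw [if_neg hg, ih]

theorem childrenB_eq (N : Int) (P : List Int) :
    pvChB N P = (PySem.List.enumerate P 1).foldl
      (fun arr pr =>
        if 1 ≤ pr.2 ∧ pr.2 ≤ N ∧ pr.1 ≤ N then
          arr.set pr.2.toNat (arr.getD pr.2.toNat [] ++ [pr.1]) else arr)
      (List.replicate (N + 1).toNat []) := by
  unfold pvChB
  rw [enum_map, List.foldl_map]

theorem childrenB_len (N : Int) (P : List Int) :
    (pvChB N P).length = (N + 1).toNat := by
  rw [childrenB_eq, childrenB_len_aux, List.length_replicate]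

theorem childrenB_getD_aux (N u : Int) (hu : 1 ≤ u) (huN : u ≤ N) (l : List (Int × Int)) :
    ∀ arr : List (List Int), arr.length = (N + 1).toNat →
      ((l.foldl (fun arr pr =>
        if 1 ≤ pr.2 ∧ pr.2 ≤ N ∧ pr.1 ≤ N then
          arr.set pr.2.toNat (arr.getD pr.2.toNat [] ++ [pr.1]) else arr) arr).getD u.toNat [])
      = arr.getD u.toNat [] ++ ((l.filter (fun pr => pr.2 == u && decide (pr.1 ≤ N))).map (fun pr => pr.1)) := by
  induction l with
  | nil => intro arr _; simp
  | cons pr t ih =>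
    intro arr hlen
    rw [List.foldl_cons, List.filter_cons]
    by_cases hg : 1 ≤ pr.2 ∧ pr.2 ≤ N ∧ pr.1 ≤ N
    · rw [if_pos hg]
      by_cases he : pr.2 = u
      · subst he
        rw [ih _ (by rw [List.length_set]; exact hlen)]
        rw [pvSetSelf _ _ _ _ (by omega)]
        have hcond : ((pr.2 == pr.2 && decide (pr.1 ≤ N)) = true) := by simp [hg.2.2]
        rw [if_pos hcond, List.map_cons, List.append_assoc, List.singleton_append]
      · rw [ih _ (by rw [List.length_set]; exact hlen)]
        rw [pvSetNe _ _ _ _ _ (by omega)]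
        have hcond : ((pr.2 == u && decide (pr.1 ≤ N)) = false) := by simp [he]
        rw [if_neg (by simp [hcond])]
    · rw [if_neg hg, ih _ hlen]
      by_cases he : pr.2 = u
      · have hNo : ¬ (pr.1 ≤ N) := fun hpr => hg ⟨by omega, by omega, hpr⟩
        rw [if_neg (by simp [hNo])]
      · rw [if_neg (by simp [he])]

theorem childrenB_getD (N : Int) (P : List Int) (u : Int) (hu : 1 ≤ u) (huN : u ≤ N) :
    (pvChB N P).getD u.toNat [] = (pvKids P u).filter (fun i => decide (i ≤ N)) := by
  rw [childrenB_eq, childrenB_getD_aux N u hu huN _ _ List.length_replicate]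
  have hrep : (List.replicate (N + 1).toNat ([] : List Int)).getD u.toNat [] = [] := by
    rw [List.getD_eq_getElem?_getD, List.getElem?_replicate]
    split <;> rfl
  rw [hrep, List.nil_append]
  unfold pvKids
  rw [List.filter_map]
  congr 1
  rw [List.filter_filter]
  apply List.filter_congr
  intro pr _
  exact Bool.and_comm _ _

-- for a reachable node all kids are ≤ N, so B's filtered list is the full kid list
theorem childrenB_getD_reach {N : Int} {A P : List Int} (h : Pre_bestNode N A P) {u : Int}
    (hr : pvReach P u) : (pvChB N P).getD u.toNat [] = pvKids P u := by
  have hb := (pv_pre_facts h).2.2.2 u hr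
  rw [childrenB_getD N P u hb.1 hb.2.1]
  apply List.filter_eq_self.mpr
  intro c hc
  have := pvKids_reach h hr hc
  simp
  omega


-- § the preorder is short: distinct first components inside 1..N

theorem pvPre_fst_nodup {N : Int} {A P : List Int} (h : Pre_bestNode N A P) {u : Int}
    (m : Int) (hr : pvReach P u) : ((pvPre N P u m).map Prod.fst).Nodup := by
  apply List.Nodup.map_on ?_ (pvPre_nodup h m hr)
  intro x hx y hy hexy
  obtain ⟨x1, x2⟩ := x
  obtain ⟨y1, y2⟩ := y
  rw [pvPre_mem h m hr] at hx hy
  simp only at hexy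
  subst hexy
  rw [hx.2, hy.2]

theorem pvPre_len {N : Int} {A P : List Int} (h : Pre_bestNode N A P) {u : Int}
    (m : Int) (hr : pvReach P u) : (pvPre N P u m).length ≤ N.toNat := by
  classical
  have hnd := pvPre_fst_nodup h m hr
  have h1 : ((pvPre N P u m).map Prod.fst).toFinset.card =
      ((pvPre N P u m).map Prod.fst).length := List.toFinset_card_of_nodup hnd
  have h2 : ((pvPre N P u m).map Prod.fst).toFinset ⊆ Finset.Icc (1 : Int) N := by
    intro x hx
    rw [List.mem_toFinset, List.mem_map] at hx
    obtain ⟨p, hp, rfl⟩ := hx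
    obtain ⟨p1, p2⟩ := p
    rw [pvPre_mem h m hr] at hp
    have := (pv_pre_facts h).2.2.2 p1 (pvSub_reach hr hp.1)
    rw [Finset.mem_Icc]
    exact ⟨this.1, this.2.1⟩
  have h3 := Finset.card_le_card h2
  have h4 : (Finset.Icc (1 : Int) N).card = N.toNat := by
    rw [Int.card_Icc]
    omega
  rw [List.length_map] at h1
  omega

-- § B's stack loop produces the preorder with multipliers

theorem pvDFS_main {N : Int} {A P : List Int} (h : Pre_bestNode N A P) :
    ∀ (f : Nat) (stack order : List (Int × Int)), (∀ p ∈ stack, pvReach P p.1) →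
      (stack.reverse.flatMap (fun p => pvPre N P p.1 p.2)).length ≤ f →
      pvDFS (pvChB N P) f stack order =
        some (order ++ stack.reverse.flatMap (fun p => pvPre N P p.1 p.2)) := by
  obtain ⟨hN, hA1, hcyc, hbnd⟩ := pv_pre_facts h
  intro f
  induction f with
  | zero =>
    intro stack order hmem hfu
    rcases List.eq_nil_or_concat stack with rfl | ⟨ys, um, rfl⟩
    · simp [pvDFS]
    · exfalso
      rw [List.concat_eq_append] at hmem hfu
      have hu := hmem um (by simp)
      rw [List.reverse_append, List.reverse_singleton, List.singleton_append,
        List.flatMap_cons, List.length_append, pvPre_unfold h um.2 hu] at hfu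
      simp at hfu
  | succ f ih =>
    intro stack order hmem hfu
    rcases List.eq_nil_or_concat stack with rfl | ⟨ys, um, rfl⟩
    · simp [pvDFS]
    · rw [List.concat_eq_append] at hmem hfu ⊢
      have hu := hmem um (by simp)
      have hub := hbnd um.1 hu
      have hget : PySem.List.pyGet? (pvChB N P) um.1 = some (pvKids P um.1) := by
        rw [pvGetSome (pvChB N P) [] um.1 (by omega)
          (by rw [childrenB_len]; omega)]
        rw [childrenB_getD_reach h hu]
      have hstep : pvDFS (pvChB N P) (f + 1) (ys ++ [um]) order =
          pvDFS (pvChB N P) f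
            (ys ++ (pvKids P um.1).map (fun c => (c, -um.2))) (order ++ [um]) := by
        rw [pvDFS, List.getLast?_concat]
        simp [hget, List.dropLast_concat]
      rw [hstep]
      have hmem' : ∀ p ∈ ys ++ (pvKids P um.1).map (fun c => (c, -um.2)), pvReach P p.1 := by
        intro p hp
        rcases List.mem_append.1 hp with hp | hp
        · exact hmem p (List.mem_append_left _ hp)
        · obtain ⟨c, hc, rfl⟩ := List.mem_map.1 hp
          exact (pvKids_reach h hu hc).1
      have hflat : (ys ++ [um]).reverse.flatMap (fun p => pvPre N P p.1 p.2) =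
          um :: ((ys ++ (pvKids P um.1).map (fun c => (c, -um.2))).reverse.flatMap
            (fun p => pvPre N P p.1 p.2)) := by
        rw [List.reverse_append, List.reverse_singleton, List.singleton_append,
          List.flatMap_cons, List.reverse_append, List.flatMap_append]
        rw [pvPre_unfold h um.2 hu]
        rw [← List.map_reverse, List.flatMap_map]
        simp
      rw [ih (ys ++ (pvKids P um.1).map (fun c => (c, -um.2))) (order ++ [um]) hmem'
        (by
          rw [hflat] at hfu
          simp at hfu ⊢
          omega)]
      rw [hflat]
      simp

-- § B's bottom-up sweep fills d1/d0 with the two games' values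

theorem pvSweep_main {N : Int} {A P : List Int} (h : Pre_bestNode N A P) :
    ∀ (R : List (Int × Int)) (d1 d0 : List Int) (done : Int → Prop),
      (∀ p ∈ R, pvReach P p.1 ∧ p.2 = pvSgn (pvDep P p.1)) →
      (R.map Prod.fst).Nodup →
      R.Pairwise (fun x y => pvParP P y.1 ≠ x.1) →
      (∀ p ∈ R, ∀ c ∈ pvKids P p.1, done c ∨ c ∈ R.map Prod.fst) →
      d1.length = (N + 1).toNat → d0.length = (N + 1).toNat →
      (∀ v : Int, done v → pvReach P v ∧
        d1.getD v.toNat 0 = pvV N A P (pvSgn (pvDep P v)) v ∧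
        d0.getD v.toNat 0 = pvV N A P (-pvSgn (pvDep P v)) v) →
      ∃ d1' d0' : List Int,
        R.foldl (fun acc um => acc.bind fun st => pvSweep A (pvChB N P) st um)
          (some (d1, d0)) = some (d1', d0') ∧
        d1'.length = (N + 1).toNat ∧ d0'.length = (N + 1).toNat ∧
        (∀ v : Int, (done v ∨ v ∈ R.map Prod.fst) →
          d1'.getD v.toNat 0 = pvV N A P (pvSgn (pvDep P v)) v ∧
          d0'.getD v.toNat 0 = pvV N A P (-pvSgn (pvDep P v)) v) ∧
        (∀ w : Nat, (∀ p ∈ R, p.1.toNat ≠ w) →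
          d1'.getD w 0 = d1.getD w 0 ∧ d0'.getD w 0 = d0.getD w 0) := by
  obtain ⟨hN, hA1, hcyc, hbnd⟩ := pv_pre_facts h
  intro R
  induction R with
  | nil =>
    intro d1 d0 done _ _ _ _ hpl hnl hdone
    refine ⟨d1, d0, rfl, hpl, hnl, ?_, fun w _ => ⟨rfl, rfl⟩⟩
    intro v hv
    rcases hv with hv | hv
    · exact (hdone v hv).2
    · simp at hv
  | cons um R' ih =>
    intro d1 d0 done hmem hnd hpw hkids hpl hnl hdone
    obtain ⟨u, m⟩ := um
    rw [List.map_cons, List.nodup_cons] at hnd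
    rw [List.pairwise_cons] at hpw
    obtain ⟨hu, hmval⟩ := hmem (u, m) List.mem_cons_self
    simp only at hu hmval
    have hub := hbnd u hu
    have hkdone : ∀ c ∈ pvKids P u, done c := by
      intro c hc
      have hpc : pvParP P c = u := pvKids_par hc
      rcases hkids (u, m) List.mem_cons_self c hc with hd | hm
      · exact hd
      · rw [List.map_cons] at hm
        rcases List.mem_cons.1 hm with he | hm
        · exfalso
          rw [he] at hpc
          exact pv_no_cycle h hu 1 (by omega) (by rw [Function.iterate_one]; exact hpc)
        · obtain ⟨q, hq, hq1⟩ := List.mem_map.1 hm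
          exact absurd (hq1 ▸ hpc) (hpw.1 q hq)
    have hgA : PySem.List.pyGet? A (u - 1) = some (A.getD (u - 1).toNat 0) :=
      pvGetSome A 0 (u - 1) (by omega) (by omega)
    have ha2 : PySem.List.pyGetD A (u - 1) 0 = A.getD (u - 1).toNat 0 := by
      rw [PySem.List.pyGetD_eq_getElem A (i := u - 1) 0 (by omega) (by omega)]
      rw [List.getD_eq_getElem?_getD, List.getElem?_eq_getElem (by omega)]
      rfl
    set a0 := A.getD (u - 1).toNat 0 with hadef
    have hgch : PySem.List.pyGet? (pvChB N P) u = some (pvKids P u) := by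
      rw [pvGetSome (pvChB N P) [] u (by omega) (by rw [childrenB_len]; omega)]
      rw [childrenB_getD_reach h hu]
    have hset1 : ∀ b : Int, PySem.List.pySet? d1 u b = some (d1.set u.toNat b) :=
      fun b => pvSetSome d1 u b (by omega) (by omega)
    have hset0 : ∀ b : Int, PySem.List.pySet? d0 u b = some (d0.set u.toNat b) :=
      fun b => pvSetSome d0 u b (by omega) (by omega)
    have hbody : pvSweep A (pvChB N P) (d1, d0) (u, m) =
        some (d1.set u.toNat (pvV N A P m u), d0.set u.toNat (pvV N A P (-m) u)) := by
      by_cases hk : pvKids P u = []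
      · have hvp : pvV N A P m u = m * a0 := by
          rw [pvV_leaf _ hk, ha2]
        have hvn : pvV N A P (-m) u = -(m * a0) := by
          rw [pvV_leaf _ hk, ha2]
          ring
        simp [pvSweep, hgA, hgch, hk, hset1, hset0, hvp, hvn]
      · have hinner : ∀ ks : List Int, (∀ c ∈ ks, c ∈ pvKids P u) →
            ∀ b1 b0 : Int,
            ks.foldl (fun acc c => acc.bind fun bb =>
                (PySem.List.pyGet? d1 c).bind fun v1 =>
                  (PySem.List.pyGet? d0 c).bind fun v0 =>
                    some (max bb.1 (m * a0 + v1), max bb.2 (-(m * a0) + v0)))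
              (some (b1, b0)) =
            some (ks.foldl (fun x c => max x (m * a0 + pvV N A P (-m) c)) b1,
              ks.foldl (fun x c => max x (-(m * a0) + pvV N A P m c)) b0) := by
          intro ks
          induction ks with
          | nil => intro _ b1 b0; rfl
          | cons c t iht =>
            intro hks b1 b0
            have hc0 : c ∈ pvKids P u := hks c List.mem_cons_self
            have hkr := pvKids_reach h hu hc0
            have hcb := hbnd c hkr.1
            have hsgnc : pvSgn (pvDep P c) = -m := by
              rw [hkr.2.2.2.2.2]
              push_cast
              rw [pvSgn_succ]
              rw [hmval]
            have hvc := (hdone c (hkdone c hc0)).2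
            have hg1 : PySem.List.pyGet? d1 c = some (pvV N A P (-m) c) := by
              rw [pvGetSome d1 0 c (by omega) (by omega), hvc.1, hsgnc]
            have hg0 : PySem.List.pyGet? d0 c = some (pvV N A P m c) := by
              rw [pvGetSome d0 0 c (by omega) (by omega), hvc.2, hsgnc]
              ring_nf
            rw [List.foldl_cons, List.foldl_cons, List.foldl_cons]
            rw [show ((some (b1, b0)).bind fun bb =>
                (PySem.List.pyGet? d1 c).bind fun v1 =>
                  (PySem.List.pyGet? d0 c).bind fun v0 =>
                    some (max bb.1 (m * a0 + v1), max bb.2 (-(m * a0) + v0))) =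
                some (max b1 (m * a0 + pvV N A P (-m) c),
                  max b0 (-(m * a0) + pvV N A P m c)) from by
              rw [Option.bind_some, hg1, Option.bind_some, hg0, Option.bind_some]]
            exact iht (fun c' hc' => hks c' (List.mem_cons_of_mem _ hc')) _ _
        have hvp : pvV N A P m u = (pvKids P u).foldl
            (fun x c => max x (m * a0 + pvV N A P (-m) c)) (-10 ^ 6) := by
          rw [pvV_node h _ hu hk]
          apply PySem.List.foldl_congr_mem
          intro acc c _
          rw [ha2]
        have hvn : pvV N A P (-m) u = (pvKids P u).foldl
            (fun x c => max x (-(m * a0) + pvV N A P m c)) (-10 ^ 6) := by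
          rw [pvV_node h _ hu hk]
          apply PySem.List.foldl_congr_mem
          intro acc c _
          rw [ha2]
          ring_nf
        simp only [pvSweep, hgA, hgch, Option.bind_some, if_neg hk]
        rw [hinner (pvKids P u) (fun c hc => hc) (-10 ^ 6) (-10 ^ 6)]
        simp only [Option.bind_some]
        rw [← hvp, ← hvn, hset1, Option.bind_some, hset0, Option.bind_some]
    rw [List.foldl_cons, Option.bind_some, hbody]
    obtain ⟨d1', d0', heq, hl1', hl0', hval, hunch⟩ := ih
      (d1.set u.toNat (pvV N A P m u)) (d0.set u.toNat (pvV N A P (-m) u))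
      (fun v => done v ∨ v = u)
      (fun p hp => hmem p (List.mem_cons_of_mem _ hp)) hnd.2 hpw.2
      (fun p hp c hc => by
        rcases hkids p (List.mem_cons_of_mem _ hp) c hc with hd | hm
        · exact Or.inl (Or.inl hd)
        · rw [List.map_cons] at hm
          rcases List.mem_cons.1 hm with he | hm
          · exact Or.inl (Or.inr he)
          · exact Or.inr hm)
      (by simp [hpl]) (by simp [hnl])
      (fun v hv => by
        rcases hv with hv | rfl
        · obtain ⟨hvr, hv1, hv0⟩ := hdone v hv
          refine ⟨hvr, ?_, ?_⟩
          · by_cases hvu : v = u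
            · subst hvu
              rw [pvSetSelf _ _ _ _ (by omega), hmval]
            · have := hbnd v hvr
              rw [pvSetNe _ _ _ _ _ (by omega)]
              exact hv1
          · by_cases hvu : v = u
            · subst hvu
              rw [pvSetSelf _ _ _ _ (by omega), hmval]
            · have := hbnd v hvr
              rw [pvSetNe _ _ _ _ _ (by omega)]
              exact hv0
        · refine ⟨hu, ?_, ?_⟩
          · rw [pvSetSelf _ _ _ _ (by omega), hmval]
          · rw [pvSetSelf _ _ _ _ (by omega), hmval])
    refine ⟨d1', d0', heq, hl1', hl0', ?_, ?_⟩
    · intro v hv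
      apply hval v
      rcases hv with hv | hv
      · exact Or.inl (Or.inl hv)
      · rw [List.map_cons] at hv
        rcases List.mem_cons.1 hv with he | hv
        · exact Or.inl (Or.inr he)
        · exact Or.inr hv
    · intro w hw
      have h2 := hunch w (fun p hp => hw p (List.mem_cons_of_mem _ hp))
      have hwu : u.toNat ≠ w := hw (u, m) List.mem_cons_self
      rw [h2.1, h2.2, pvSetNe _ _ _ _ _ (Ne.symm hwu), pvSetNe _ _ _ _ _ (Ne.symm hwu)]
      exact ⟨rfl, rfl⟩


-- § the two implementations of the level loop agree on the keys 1..N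

theorem pv_level_inner {N : Int} {A P : List Int} (h : Pre_bestNode N A P)
    (i : Int) (h1 : 1 ≤ i) (h2 : i ≤ N) :
    ∀ ks : List Int, (∀ e ∈ ks, 1 ≤ e) →
      ∀ (lvd : PySem.Dict Int Int) (lvl : List Int), lvl.length = (N + 1).toNat →
      (∀ x : Int, 1 ≤ x → x ≤ N → lvd.getD x 0 = lvl.getD x.toNat 0) →
      ((ks.filter (fun c => decide (c ≤ N))).foldl
          (fun lv c => lv.set c.toNat (lv.getD i.toNat 0 + 1)) lvl).length = (N + 1).toNat ∧
      (∀ x : Int, 1 ≤ x → x ≤ N →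
        (ks.foldl (fun lv e => lv.insert e (lv.getD i 0 + 1)) lvd).getD x 0 =
        ((ks.filter (fun c => decide (c ≤ N))).foldl
          (fun lv c => lv.set c.toNat (lv.getD i.toNat 0 + 1)) lvl).getD x.toNat 0) := by
  obtain ⟨hN, hA1, hcyc, hbnd⟩ := pv_pre_facts h
  intro ks
  induction ks with
  | nil =>
    intro _ lvd lvl hl hrel
    exact ⟨hl, hrel⟩
  | cons e t ih =>
    intro hpos lvd lvl hl hrel
    have he1 : 1 ≤ e := hpos e List.mem_cons_self
    rw [List.foldl_cons, List.filter_cons]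
    by_cases heN : e ≤ N
    · rw [if_pos (by simp [heN]), List.foldl_cons]
      apply ih (fun e' he' => hpos e' (List.mem_cons_of_mem _ he'))
      · rw [List.length_set]
        exact hl
      · intro x hx1 hx2
        rw [PySem.Dict.getD_insert]
        by_cases hxe : x = e
        · subst hxe
          rw [if_pos rfl, pvSetSelf _ _ _ _ (by omega), hrel i h1 h2]
        · rw [if_neg hxe, pvSetNe _ _ _ _ _ (by omega)]
          exact hrel x hx1 hx2
    · rw [if_neg (by simp [heN])]
      apply ih (fun e' he' => hpos e' (List.mem_cons_of_mem _ he')) _ lvl hl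
      intro x hx1 hx2
      rw [PySem.Dict.getD_insert, if_neg (by omega)]
      exact hrel x hx1 hx2

theorem pv_level_sim {N : Int} {A P : List Int} (h : Pre_bestNode N A P) :
    ∀ j : Nat, (j : Int) ≤ N →
      (((PySem.List.pyRange 1 ((j : Int) + 1) 1).foldl
        (fun lv i => ((pvChB N P).getD i.toNat []).foldl
          (fun lv c => lv.set c.toNat (lv.getD i.toNat 0 + 1)) lv)
        ((List.replicate (N + 1).toNat (0 : Int)).set 1 1)).length = (N + 1).toNat) ∧
      ∀ x : Int, 1 ≤ x → x ≤ N →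
        ((PySem.List.pyRange 1 ((j : Int) + 1) 1).foldl
          (fun lv i => ((pvChildrenA P).getD i []).foldl
            (fun lv e => lv.insert e (lv.getD i 0 + 1)) lv)
          (PySem.Dict.empty.insert 1 1)).getD x 0 =
        ((PySem.List.pyRange 1 ((j : Int) + 1) 1).foldl
          (fun lv i => ((pvChB N P).getD i.toNat []).foldl
            (fun lv c => lv.set c.toNat (lv.getD i.toNat 0 + 1)) lv)
          ((List.replicate (N + 1).toNat (0 : Int)).set 1 1)).getD x.toNat 0 := by
  obtain ⟨hN, hA1, hcyc, hbnd⟩ := pv_pre_facts h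
  intro j
  induction j with
  | zero =>
    intro _
    rw [PySem.List.pyRange_one_eq_nil (by omega)]
    simp only [List.foldl_nil]
    refine ⟨by simp, ?_⟩
    intro x hx1 hx2
    rw [PySem.Dict.getD_insert]
    by_cases hx : x = 1
    · subst hx
      rw [if_pos rfl]
      rw [show (1 : Int).toNat = 1 from rfl]
      rw [pvSetSelf _ _ _ _ (by simp; omega)]
    · rw [if_neg hx, PySem.Dict.getD_empty, pvSetNe _ _ _ _ _ (by omega)]
      rw [pvRepGetD _ _ _ _ (by omega)]
  | succ j ih =>
    intro hj
    obtain ⟨ihl, ihrel⟩ := ih (by omega)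
    have hsplit : PySem.List.pyRange 1 ((j : Int) + 1 + 1) 1 =
        PySem.List.pyRange 1 ((j : Int) + 1) 1 ++ [(j : Int) + 1] := by
      exact_mod_cast PySem.List.pyRange_one_succ_right (a := 1) (b := (j : Int) + 1) (by omega)
    rw [show (((j + 1 : Nat) : Int)) = (j : Int) + 1 by omega, hsplit, List.foldl_append,
      List.foldl_append]
    rw [List.foldl_cons, List.foldl_nil, List.foldl_cons, List.foldl_nil]
    set i : Int := (j : Int) + 1 with hidef
    have hchA : (pvChildrenA P).getD i [] = pvKids P i := childrenA_getD P i (by omega)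
    have hchB : (pvChB N P).getD i.toNat [] = (pvKids P i).filter (fun c => decide (c ≤ N)) :=
      childrenB_getD N P i (by omega) (by omega)
    rw [hchA, hchB]
    have hpos : ∀ e ∈ pvKids P i, 1 ≤ e := by
      intro e hee
      rw [mem_pvKids] at hee
      omega
    exact pv_level_inner h i (by omega) (by omega) (pvKids P i) hpos _ _ ihl ihrel

-- § the final assembly

theorem bestNode_spec : Claim_equal_bestNode := by
  intro N A P hdom h
  unfold Spec_bestNode
  obtain ⟨hN, hA1, hcyc, hbnd⟩ := pv_pre_facts h
  have hr1 : pvReach P 1 := ⟨0, rfl⟩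
  have hm1 : pvMul 1 = 1 := by norm_num [pvMul]
  have hmn1 : pvMul (-1) = -1 := by norm_num [pvMul]
  -- ===== the A side =====
  have hinit : ∀ v : Int, pvSub P (1 : Int) v →
      (List.replicate (N + 1).toNat (-1 : Int)).getD v.toNat 0 = -1 := by
    intro v hs
    have := hbnd v hs
    exact pvRepGetD _ _ _ _ (by omega)
  obtain ⟨dp1', heq1, hl1, hst1, hun1⟩ := A_main h (N.toNat + 1) 1 1
    (List.replicate (N + 1).toNat (-1)) hr1 (by rw [pvDep_one]; omega) (by simp) hinit
  obtain ⟨dp0', heq0, hl0, hst0, hun0⟩ := A_main h (N.toNat + 1) (-1) 1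
    (List.replicate (N + 1).toNat (-1)) hr1 (by rw [pvDep_one]; omega) (by simp) hinit
  rw [hm1] at heq1 hst1
  rw [hmn1] at heq0 hst0
  have hAeq : bestNode N A P =
      (PySem.List.pyRange 1 (N + 1) 1).foldl
        (fun a i =>
          if PySem.Int.mod
              (((PySem.List.pyRange 1 (N + 1) 1).foldl
                (fun lv i => ((pvChildrenA P).getD i []).foldl
                  (fun lv e => lv.insert e (lv.getD i 0 + 1)) lv)
                (PySem.Dict.empty.insert 1 1)).getD i 0) 2 = 1
          then max a ((dp1'.set 0 (pvV N A P 1 1)).getD i.toNat 0)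
          else max a ((dp0'.set 0 (pvV N A P (-1) 1)).getD i.toNat 0))
        (pvV N A P 1 1) := by
    simp [bestNode, heq1, heq0]
  -- ===== the B side =====
  have horder : pvDFS (pvChB N P) (N.toNat + 1) [(1, 1)] [] = some (pvPre N P 1 1) := by
    have hx := pvDFS_main h (N.toNat + 1) [(1, 1)] []
      (by
        intro p hp
        rw [List.mem_singleton] at hp
        subst hp
        exact hr1)
      (by
        have := pvPre_len h 1 hr1
        simpa using (by omega : (pvPre N P 1 1).length ≤ N.toNat + 1))
    simpa using hx
  have hmemR : ∀ p ∈ (pvPre N P 1 1).reverse, pvReach P p.1 ∧ p.2 = pvSgn (pvDep P p.1) := by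
    intro p hp
    rw [List.mem_reverse] at hp
    obtain ⟨p1, p2⟩ := p
    rw [pvPre_mem h 1 hr1] at hp
    refine ⟨hp.1, ?_⟩
    rw [hp.2]
    unfold pvSnd
    rw [pvDep_one]
    push_cast
    rw [sub_zero, one_mul]
  obtain ⟨d1F, d0F, hswe, hl1F, hl0F, hvalF, hunF⟩ := pvSweep_main h
    (pvPre N P 1 1).reverse
    (List.replicate (N + 1).toNat (-1)) (List.replicate (N + 1).toNat (-1))
    (fun _ => False)
    hmemR
    (by
      rw [List.map_reverse]
      exact List.nodup_reverse.2 (pvPre_fst_nodup h 1 hr1))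
    (List.pairwise_reverse.2 ((pvPre_pairwise h (N.toNat - pvDep P 1) 1 1 hr1 (by omega))))
    (fun p hp c hc => by
      right
      rw [List.map_reverse, List.mem_reverse, List.mem_map]
      have hpr := hmemR p hp
      have hkr := pvKids_reach h hpr.1 hc
      refine ⟨(c, pvSnd P 1 1 c), ?_, rfl⟩
      rw [pvPre_mem h 1 hr1]
      exact ⟨hkr.1, rfl⟩)
    (by simp) (by simp)
    (fun v hv => hv.elim)
  have hmemfst : ∀ v : Int, pvReach P v → v ∈ ((pvPre N P 1 1).reverse).map Prod.fst := by
    intro v hv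
    rw [List.map_reverse, List.mem_reverse, List.mem_map]
    exact ⟨(v, pvSnd P 1 1 v), (pvPre_mem h 1 hr1 v _).2 ⟨hv, rfl⟩, rfl⟩
  have hd1at1 : PySem.List.pyGet? d1F 1 = some (pvV N A P 1 1) := by
    rw [pvGetSome d1F 0 1 (by omega) (by omega)]
    rw [(hvalF 1 (Or.inr (hmemfst 1 hr1))).1, pvDep_one]
    norm_num [pvSgn]
  have hBeq : bestNode_alt N A P =
      (PySem.List.pyRange 1 (N + 1) 1).foldl
        (fun best i =>
          max best (if PySem.Int.mod
              (((PySem.List.pyRange 1 (N + 1) 1).foldl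
                (fun lv i => ((pvChB N P).getD i.toNat []).foldl
                  (fun lv c => lv.set c.toNat (lv.getD i.toNat 0 + 1)) lv)
                ((List.replicate (N + 1).toNat (0 : Int)).set 1 1)).getD i.toNat 0) 2 = 1
            then d1F.getD i.toNat 0 else d0F.getD i.toNat 0))
        (pvV N A P 1 1) := by
    simp [bestNode_alt, horder, hswe, hd1at1]
  rw [hAeq, hBeq]
  -- ===== the two selection folds agree pointwise =====
  apply PySem.List.foldl_congr_mem
  intro acc i hi
  rw [PySem.List.mem_pyRange_one] at hi
  have hi1 : 1 ≤ i := hi.1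
  have hiN : i ≤ N := by omega
  have hlvl := (pv_level_sim h N.toNat (by omega)).2 i hi1 hiN
  rw [show ((N.toNat : Nat) : Int) = N by omega] at hlvl
  have hd1 : (dp1'.set 0 (pvV N A P 1 1)).getD i.toNat 0 = d1F.getD i.toNat 0 := by
    rw [pvSetNe _ _ _ _ _ (by omega)]
    by_cases hri : pvReach P i
    · rw [hst1 i hri, (hvalF i (Or.inr (hmemfst i hri))).1]
      rw [pvDep_one]
      push_cast
      rw [sub_zero, one_mul]
    · rw [hun1 i.toNat (fun v hs hv => hri (by
        have := hbnd v hs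
        have hvi : v = i := by omega
        exact hvi ▸ hs))]
      rw [(hunF i.toNat (fun p hp hv => hri (by
        have hpr := hmemR p hp
        have := hbnd p.1 hpr.1
        have hvi : p.1 = i := by omega
        exact hvi ▸ hpr.1))).1]
  have hd0 : (dp0'.set 0 (pvV N A P (-1) 1)).getD i.toNat 0 = d0F.getD i.toNat 0 := by
    rw [pvSetNe _ _ _ _ _ (by omega)]
    by_cases hri : pvReach P i
    · rw [hst0 i hri, (hvalF i (Or.inr (hmemfst i hri))).2]
      rw [pvDep_one]
      push_cast
      rw [sub_zero]
      ring_nf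
    · rw [hun0 i.toNat (fun v hs hv => hri (by
        have := hbnd v hs
        have hvi : v = i := by omega
        exact hvi ▸ hs))]
      rw [(hunF i.toNat (fun p hp hv => hri (by
        have hpr := hmemR p hp
        have := hbnd p.1 hpr.1
        have hvi : p.1 = i := by omega
        exact hvi ▸ hpr.1))).2]
  rw [hlvl, hd1, hd0]
  split <;> rfl
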